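-- pv_equiv track=rewrite | github.com/Chopinsky/algo-problems | challenges/3999/3710-maximum-partition-factor.py | maxPartitionFactor
-- ===== SOURCE A (Python) =====
-- from typing import List
--
-- def maxPartitionFactor(points: List[List[int]]) -> int:
--   n = len(points)
--   if n == 2:
--     return 0
--
--   def dist(a: List, b: List) -> int:
--     return abs(a[0]-b[0]) + abs(a[1]-b[1])
--
--   dist = [(dist(points[i], points[j]), i, j) for i in range(n) for j in range(i+1, n)]
--   dist.sort()
--
--   p = [i for i in range(n)]
--   wt = [1]*n
--   opp = {}
--
--   def find(x: int):
--     if p[x] != x: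
--       p[x] = find(p[x])
--
--     return p[x]
--
--   def join(x: int, y: int):
--     rx = find(x)
--     ry = find(y)
--
--     # swap to get into the right order
--     if wt[rx] < wt[ry]:
--       x, y = y, x
--
--     wt[ry] += wt[rx]
--     p[rx] = ry
--
--   for d, i, j in dist:
--     # this pair is in the same group, we're done,
--     # can't get better results
--     if find(i) == find(j):
--       return d
--
--     # add j to the opposite of i
--     if i in opp:
--       join(opp[i], j)
--
--     # add i to the opposite of j
--     if j in opp:
--       join(opp[j], i)
--
--     # init, add points in this pair
--     # to the opposite side
--     opp[i] = j
--     opp[j] = i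
--
--   return dist[-1][0]
-- ===== SOURCE B (Python) =====
-- def maxPartitionFactor(points):
--   n = len(points)
--   if n == 2:
--     return 0
--
--   dist = sorted((abs(points[i][0] - points[j][0]) + abs(points[i][1] - points[j][1]), i, j)
--                 for i in range(n) for j in range(i + 1, n))
--
--   def bipartite(k):
--     # is the graph whose edges are the k closest pairs 2-colorable?
--     adj = {}
--     for _, i, j in dist[:k]:
--       adj.setdefault(i, []).append(j)
--       adj.setdefault(j, []).append(i)
--     color = {}
--     for s in adj:
--       if s in color:
--         continue
--       color[s] = 0
--       stack = [s]
--       while stack: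
--         u = stack.pop()
--         for v in adj[u]:
--           if v not in color:
--             color[v] = 1 - color[u]
--             stack.append(v)
--           elif color[v] == color[u]:
--             return False
--     return True
--
--   if bipartite(len(dist)):
--     return dist[-1][0]
--   # binary search the smallest k whose k closest pairs are not 2-colorable
--   lo, hi = 0, len(dist)   # bipartite(lo) holds, bipartite(hi) fails
--   while hi - lo > 1:
--     mid = (lo + hi) // 2
--     if bipartite(mid):
--       lo = mid
--     else:
--       hi = mid
--   return dist[hi - 1][0]
-- ===== Notes on version B (the rewrite author's own statement) =====
-- stated objective: alternative
-- what changed: The incremental enemy-union-find sweep is replaced by a binary search over sorted edge prefixes, each tested from scratch with a stack-based greedy 2-coloring (bipartiteness check); no union-find, no enemy map, no incremental state across edges.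
import Mathlib
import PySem

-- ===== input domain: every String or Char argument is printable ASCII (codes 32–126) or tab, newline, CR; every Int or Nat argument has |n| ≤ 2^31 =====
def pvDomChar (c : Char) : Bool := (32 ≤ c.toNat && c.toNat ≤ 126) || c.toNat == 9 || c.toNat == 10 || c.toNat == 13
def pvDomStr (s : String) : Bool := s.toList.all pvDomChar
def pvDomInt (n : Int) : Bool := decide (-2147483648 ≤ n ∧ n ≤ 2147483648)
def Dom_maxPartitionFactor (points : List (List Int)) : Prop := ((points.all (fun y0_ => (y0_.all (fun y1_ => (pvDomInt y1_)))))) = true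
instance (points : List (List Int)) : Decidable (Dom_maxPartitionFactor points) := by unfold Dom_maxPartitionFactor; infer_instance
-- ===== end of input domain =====

-- B replaces A's incremental enemy-union-find sweep by a binary search over sorted edge
-- prefixes, each prefix tested from scratch with a stack-based greedy 2-coloring
-- (bipartiteness check). Objective: alternative (similar cost, no speed claim).

-- ===== PORT A =====

-- dist(a, b) = abs(a[0]-b[0]) + abs(a[1]-b[1]); pyGetD with default 0 is exact here: inside
-- Pre_ every point reached by the comprehension has at least two coordinates.
def pvDist (a b : List Int) : Int :=
  |PySem.List.pyGetD a 0 0 - PySem.List.pyGetD b 0 0| +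
    |PySem.List.pyGetD a 1 0 - PySem.List.pyGetD b 1 0|

-- [(dist(points[i], points[j]), i, j) for i in range(n) for j in range(i+1, n)]
-- (shared verbatim by both ports: Source B builds its edge list with the identical expression)
def pvEdges (points : List (List Int)) : List (Int × Int × Int) :=
  (PySem.List.pyRange 0 points.length 1).flatMap (fun i =>
    (PySem.List.pyRange (i + 1) points.length 1).map (fun j =>
      (pvDist (PySem.List.pyGetD points i []) (PySem.List.pyGetD points j []), i, j)))

-- dist.sort() / sorted(...): the triples are pairwise distinct and generated in (i, j)-lex
-- order, so Python's full-tuple lexicographic sort equals this STABLE sort on the first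
-- component.
def pvSortedEdges (points : List (List Int)) : List (Int × Int × Int) :=
  PySem.List.sorted (pvEdges points) (fun t => t.1) false

-- def find(x): if p[x] != x: p[x] = find(p[x]); return p[x]
-- fuel = len(p) at every call site; fuel 0 is unreachable inside Pre_ (parent chains are
-- acyclic and visit pairwise-distinct indices, proved below), so this is the Python recursion.
def pvFindA (p : List Int) (x : Int) : Nat → List Int × Int
  | 0 => (p, x)
  | fuel + 1 =>
    let px := PySem.List.pyGetD p x 0
    if px = x then (p, x)
    else
      let r := pvFindA p px fuel
      (r.1.set x.toNat r.2, r.2)   -- p[x] = find(p[x]); x is a valid non-negative index here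

-- def join(x, y): rx = find(x); ry = find(y); (swap); wt[ry] += wt[rx]; p[rx] = ry
def pvJoinA (p wt : List Int) (x y : Int) : List Int × List Int :=
  let f1 := pvFindA p x p.length
  let f2 := pvFindA f1.1 y f1.1.length
  let rx := f1.2
  let ry := f2.2
  -- 'if wt[rx] < wt[ry]: x, y = y, x' — the swapped x, y are never used afterwards
  let _xy := if PySem.List.pyGetD wt rx 0 < PySem.List.pyGetD wt ry 0 then (y, x) else (x, y)
  let wt' := wt.set ry.toNat (PySem.List.pyGetD wt ry 0 + PySem.List.pyGetD wt rx 0)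
  (f2.1.set rx.toNat ry, wt')

-- the 'for d, i, j in dist' loop; 'some d' is the early 'return d'
def pvLoopA (edges : List (Int × Int × Int)) (p wt : List Int)
    (opp : PySem.Dict Int Int) : Option Int :=
  match edges with
  | [] => none
  | (d, i, j) :: rest =>
    let f1 := pvFindA p i p.length
    let f2 := pvFindA f1.1 j f1.1.length
    if f1.2 = f2.2 then some d
    else
      let s1 := match opp.get? i with
        | some oi => pvJoinA f2.1 wt oi j
        | none => (f2.1, wt)
      let s2 := match opp.get? j with
        | some oj => pvJoinA s1.1 s1.2 oj i
        | none => s1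
      pvLoopA rest s2.1 s2.2 ((opp.insert i j).insert j i)

def maxPartitionFactor (points : List (List Int)) : Int :=
  if points.length = 2 then 0
  else
    let dist := pvSortedEdges points
    let p := PySem.List.pyRange 0 points.length 1   -- [i for i in range(n)]
    let wt := List.replicate points.length (1 : Int)
    match pvLoopA dist p wt PySem.Dict.empty with
    | some d => d
    | none => (PySem.List.pyGetD dist (-1) (0, 0, 0)).1  -- dist[-1][0]; IndexError (n < 2) is outside Pre_

-- ===== PORT B =====

-- adj.setdefault(i, []).append(j); adj.setdefault(j, []).append(i)  over dist[:k]
-- (setdefault+append in one step is exactly Dict.modify with default [])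
def pvAdjacency (pref : List (Int × Int × Int)) : PySem.Dict Int (List Int) :=
  pref.foldl
    (fun d e => (d.modify e.2.1 [] (· ++ [e.2.2])).modify e.2.2 [] (· ++ [e.2.1]))
    PySem.Dict.empty

-- 'for v in adj[u]: …' with the early 'return False'; the stack's top is its head here
-- (Python appends and pops at the same end — a LIFO, encoded with head push/pop)
def pvVisit (cu : Int) (nbrs : List Int) (color : PySem.Dict Int Int) (stack : List Int) :
    Option (PySem.Dict Int Int × List Int) :=
  match nbrs with
  | [] => some (color, stack)
  | v :: rest =>
    match color.get? v with
    | none => pvVisit cu rest (color.insert v (1 - cu)) (v :: stack)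
    | some cv => if cv = cu then none else pvVisit cu rest color stack

-- 'while stack: u = stack.pop(); …'; fuel = adj.size + 1 is enough: each iteration pops one
-- element and the quantity |stack| + #uncolored-keys drops by exactly one (proved below);
-- 'none' is Python's 'return False' (the fuel-0 branch is unreachable under that bound).
-- color[u] is total here: every pushed node is colored first, so getD is exact.
def pvColorLoop (adj : PySem.Dict Int (List Int)) : Nat → PySem.Dict Int Int → List Int →
    Option (PySem.Dict Int Int)
  | _, color, [] => some color
  | 0, _, _ :: _ => none
  | fuel + 1, color, u :: st =>
    match pvVisit (color.getD u 0) (adj.getD u []) color st with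
    | none => none
    | some (c', s') => pvColorLoop adj fuel c' s'

-- 'for s in adj: if s in color: continue; color[s] = 0; stack = [s]; while …'
def pvSeedLoop (adj : PySem.Dict Int (List Int)) : List Int → PySem.Dict Int Int →
    Option (PySem.Dict Int Int)
  | [], color => some color
  | s :: rest, color =>
    if color.contains s then pvSeedLoop adj rest color
    else
      match pvColorLoop adj (adj.size + 1) (color.insert s 0) [s] with
      | none => none
      | some c' => pvSeedLoop adj rest c'

-- bipartite(k) of Source B: 'some _' is True, 'none' is False
def pvBipartiteOf (pref : List (Int × Int × Int)) : Bool :=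
  let adj := pvAdjacency pref
  (pvSeedLoop adj adj.keys PySem.Dict.empty).isSome

def pvBipartite (dist : List (Int × Int × Int)) (k : Int) : Bool :=
  pvBipartiteOf (PySem.List.slice dist none (some k))

-- 'while hi - lo > 1: mid = (lo + hi) // 2; …'; fuel = len(dist) bounds hi - lo
def pvBsearch (dist : List (Int × Int × Int)) : Nat → Int → Int → Int
  | fuel, lo, hi =>
    if 1 < hi - lo then
      match fuel with
      | 0 => 0  -- unreachable: hi - lo ≤ fuel at every call (proved below)
      | f + 1 =>
        let mid := PySem.Int.floordiv (lo + hi) 2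
        if pvBipartite dist mid then pvBsearch dist f mid hi else pvBsearch dist f lo mid
    else (PySem.List.pyGetD dist (hi - 1) (0, 0, 0)).1   -- dist[hi - 1][0]

def maxPartitionFactor_alt (points : List (List Int)) : Int :=
  if points.length = 2 then 0
  else
    let dist := pvSortedEdges points
    if pvBipartite dist (dist.length : Int) then
      (PySem.List.pyGetD dist (-1) (0, 0, 0)).1   -- dist[-1][0]; IndexError (n < 2) is outside Pre_
    else pvBsearch dist dist.length 0 (dist.length : Int)

-- ===== PRECONDITION & SPEC =====
-- Pre_ excludes exactly the inputs on which the Python A raises IndexError: fewer than two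
-- points (dist[-1] on the empty edge list), and n ≥ 3 with some point of fewer than two
-- coordinates (dist() indexes a[0], a[1]). B raises the same way there.
def Pre_maxPartitionFactor (points : List (List Int)) : Prop :=
  2 ≤ points.length ∧ (points.length = 2 ∨ ∀ q ∈ points, 2 ≤ q.length)
instance (points : List (List Int)) : Decidable (Pre_maxPartitionFactor points) := by
  unfold Pre_maxPartitionFactor; infer_instance

def pvWitness_maxPartitionFactor : List (List Int) := [[0, 0], [3, 1], [1, 2]]

def Spec_maxPartitionFactor (points : List (List Int)) (out : Int) : Prop :=
  out = maxPartitionFactor_alt points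
instance (points : List (List Int)) (out : Int) : Decidable (Spec_maxPartitionFactor points out) := by
  unfold Spec_maxPartitionFactor; infer_instance

-- ===== CLAIM (what is proved, stated in full; the proofs are below) =====
def Claim_equal_maxPartitionFactor : Prop :=
  ∀ (points : List (List Int)), Dom_maxPartitionFactor points →
    Pre_maxPartitionFactor points → Spec_maxPartitionFactor points (maxPartitionFactor points)

-- ===== LEMMAS AND PROOFS =====


-- ---- the abstract parent-chasing view of A's union-find ----

-- parent of x in the array p (only ever read at 0 ≤ x < len p)
def pvPa (p : List Int) (x : Int) : Int := PySem.List.pyGetD p x 0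

def pvChase (p : List Int) : Nat → Int → Int
  | 0, x => x
  | f + 1, x => if pvPa p x = x then x else pvChase p f (pvPa p x)

def pvRoot (p : List Int) (x : Int) : Int := pvChase p p.length x

def pvInRange (p : List Int) : Prop :=
  ∀ (k : Nat) (h : k < p.length), 0 ≤ p[k] ∧ p[k] < (p.length : Int)

-- a valid union-find state: entries in range and an acyclicity ranking
def pvInv (p : List Int) : Prop :=
  pvInRange p ∧ ∃ R : Int → Nat,
    ∀ x : Int, 0 ≤ x → x < (p.length : Int) → pvPa p x ≠ x → R (pvPa p x) < R x

lemma pvPa_range {p : List Int} (hp : pvInRange p) {x : Int} (h0 : 0 ≤ x)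
    (h1 : x < (p.length : Int)) : 0 ≤ pvPa p x ∧ pvPa p x < (p.length : Int) := by
  have hlt : x.toNat < p.length := by omega
  have h := hp x.toNat hlt
  rw [pvPa, PySem.List.pyGetD_eq_getElem p 0 h0 h1]
  exact h

lemma pvChase_range {p : List Int} (hp : pvInRange p) (f : Nat) {x : Int} (h0 : 0 ≤ x)
    (h1 : x < (p.length : Int)) : 0 ≤ pvChase p f x ∧ pvChase p f x < (p.length : Int) := by
  induction f generalizing x with
  | zero => exact ⟨h0, h1⟩
  | succ f ih =>
    rw [pvChase]
    by_cases hfix : pvPa p x = x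
    · simp only [if_pos hfix]; exact ⟨h0, h1⟩
    · simp only [if_neg hfix]
      obtain ⟨hh0, hh1⟩ := pvPa_range hp h0 h1
      exact ih hh0 hh1

lemma pvChase_of_fix {p : List Int} {x : Int} (h : pvPa p x = x) (f : Nat) :
    pvChase p f x = x := by
  induction f with
  | zero => rfl
  | succ f _ => rw [pvChase, if_pos h]

lemma pvChase_add (p : List Int) (f g : Nat) (x : Int) :
    pvChase p (f + g) x = pvChase p g (pvChase p f x) := by
  induction f generalizing x with
  | zero => simp [pvChase]
  | succ f ih =>
    by_cases hfix : pvPa p x = x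
    · rw [show f + 1 + g = (f + g) + 1 from by omega, pvChase, if_pos hfix,
        pvChase, if_pos hfix, pvChase_of_fix hfix]
    · rw [show f + 1 + g = (f + g) + 1 from by omega, pvChase, if_neg hfix,
        pvChase, if_neg hfix, ih]

-- pigeonhole: under the invariant, len p steps always reach a fixpoint
lemma pvRoot_fix {p : List Int} (hp : pvInv p) {x : Int} (h0 : 0 ≤ x)
    (h1 : x < (p.length : Int)) : pvPa p (pvRoot p x) = pvRoot p x := by
  obtain ⟨hr, R, hR⟩ := hp
  by_contra hfix
  have hall : ∀ k, k ≤ p.length → pvPa p (pvChase p k x) ≠ pvChase p k x := by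
    intro k hk hfk
    apply hfix
    have he : pvChase p p.length x = pvChase p k x := by
      rw [show p.length = k + (p.length - k) from by omega, pvChase_add, pvChase_of_fix hfk]
    simp only [pvRoot, he]
    exact hfk
  have hrange : ∀ k : Nat, 0 ≤ pvChase p k x ∧ pvChase p k x < (p.length : Int) :=
    fun k => pvChase_range hr k h0 h1
  have hsucc : ∀ k, pvPa p (pvChase p k x) ≠ pvChase p k x →
      pvChase p (k + 1) x = pvPa p (pvChase p k x) := by
    intro k hne
    rw [pvChase_add p k 1, pvChase, if_neg hne]
    rfl
  have hdec : ∀ k, k < p.length → R (pvChase p (k + 1) x) < R (pvChase p k x) := by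
    intro k hk
    have hne := hall k (Nat.le_of_lt hk)
    rw [hsucc k hne]
    exact hR _ (hrange k).1 (hrange k).2 hne
  have hmono : ∀ a b, a < b → b ≤ p.length → R (pvChase p b x) < R (pvChase p a x) := by
    intro a b hab hb
    induction b with
    | zero => omega
    | succ b ih =>
      rcases Nat.lt_or_ge a b with h | h
      · exact lt_trans (hdec b (by omega)) (ih h (by omega))
      · have : a = b := by omega
        subst this
        exact hdec a (by omega)
  have hinj : Function.Injective (fun k : Fin (p.length + 1) =>
      (⟨(pvChase p k.val x).toNat, by
        have ha := (hrange k.val).1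
        have hb := (hrange k.val).2
        omega⟩ : Fin p.length)) := by
    intro a b hab
    by_contra hne
    have heq : pvChase p a.val x = pvChase p b.val x := by
      have hv := congrArg Fin.val hab
      simp only at hv
      have ha := (hrange a.val).1
      have hb := (hrange b.val).1
      omega
    rcases Nat.lt_or_ge a.val b.val with h | h
    · have := hmono a.val b.val h (by omega)
      rw [heq] at this
      omega
    · have hba : b.val < a.val := by
        rcases Nat.lt_or_ge b.val a.val with h' | h'
        · exact h'
        · exact absurd (Fin.ext (by omega)) hne
      have := hmono b.val a.val hba (by omega)
      rw [heq] at this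
      omega
  have hcard := Fintype.card_le_of_injective _ hinj
  simp [Fintype.card_fin] at hcard

lemma pvRoot_of_fix {p : List Int} {x : Int} (h : pvPa p x = x) : pvRoot p x = x := by
  exact pvChase_of_fix h p.length

lemma pvRoot_pa {p : List Int} (hp : pvInv p) {x : Int} (h0 : 0 ≤ x)
    (h1 : x < (p.length : Int)) (hne : pvPa p x ≠ x) : pvRoot p (pvPa p x) = pvRoot p x := by
  have key : ∀ m, pvChase p (1 + m) x = pvChase p m (pvPa p x) := by
    intro m
    rw [pvChase_add]
    congr 1
    rw [pvChase, if_neg hne]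
    rfl
  have hfix := pvRoot_fix hp h0 h1
  simp only [pvRoot] at hfix ⊢
  have e1 : pvChase p p.length x = pvChase p (p.length - 1) (pvPa p x) := by
    conv_lhs => rw [show p.length = 1 + (p.length - 1) from by omega]
    exact key _
  have e2 : pvChase p p.length (pvPa p x) =
      pvChase p 1 (pvChase p (p.length - 1) (pvPa p x)) := by
    conv_lhs => rw [show p.length = (p.length - 1) + 1 from by omega]
    exact pvChase_add p (p.length - 1) 1 (pvPa p x)
  rw [e2, ← e1, pvChase, if_pos hfix]


lemma pvPa_set {p : List Int} {x : Int} (h0 : 0 ≤ x) (h1 : x < (p.length : Int)) (r : Int) :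
    ∀ z : Int, 0 ≤ z → pvPa (p.set x.toNat r) z = if z = x then r else pvPa p z := by
  intro z hz0
  by_cases hzx : z = x
  · subst hzx
    rw [if_pos rfl, pvPa, PySem.List.pyGetD_eq_getElem _ 0 hz0 (by simp; omega)]
    simp
  · rw [if_neg hzx, pvPa, pvPa, PySem.List.pyGetD_of_nonneg _ _ hz0,
      PySem.List.pyGetD_of_nonneg _ _ hz0, List.getD, List.getD]
    rw [List.getElem?_set_ne (by omega)]

lemma pvR_chase_le {p : List Int} (hr : pvInRange p) (R : Int → Nat)
    (hR : ∀ x : Int, 0 ≤ x → x < (p.length : Int) → pvPa p x ≠ x → R (pvPa p x) < R x) :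
    ∀ (f : Nat) (z : Int), 0 ≤ z → z < (p.length : Int) → R (pvChase p f z) ≤ R z := by
  intro f
  induction f with
  | zero => intro z _ _; exact Nat.le_refl _
  | succ f ih =>
    intro z hz0 hz1
    rw [pvChase]
    by_cases hfz : pvPa p z = z
    · rw [if_pos hfz]
    · rw [if_neg hfz]
      obtain ⟨ha, hb⟩ := pvPa_range hr hz0 hz1
      exact Nat.le_trans (ih _ ha hb) (Nat.le_of_lt (hR z hz0 hz1 hfz))

lemma pvRoot_eq_chase_pa {p : List Int} {x : Int} (h0 : 0 ≤ x) (h1 : x < (p.length : Int))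
    (hne : pvPa p x ≠ x) : pvRoot p x = pvChase p (p.length - 1) (pvPa p x) := by
  simp only [pvRoot]
  conv_lhs => rw [show p.length = 1 + (p.length - 1) from by omega]
  rw [pvChase_add]
  congr 1
  rw [pvChase, if_neg hne]
  rfl

-- compression step: p[x] := root(x) preserves the invariant and every root
lemma pvCompress {p : List Int} (hp : pvInv p) {x : Int} (h0 : 0 ≤ x)
    (h1 : x < (p.length : Int)) :
    pvInv (p.set x.toNat (pvRoot p x)) ∧
      ∀ z : Int, 0 ≤ z → z < (p.length : Int) →
        pvRoot (p.set x.toNat (pvRoot p x)) z = pvRoot p z := by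
  obtain ⟨hr, R, hR⟩ := hp
  have hinv : pvInv p := ⟨hr, R, hR⟩
  set r := pvRoot p x with hrdef
  have hr0 : 0 ≤ r := (pvChase_range hr p.length h0 h1).1
  have hr1 : r < (p.length : Int) := (pvChase_range hr p.length h0 h1).2
  have hfixr : pvPa p r = r := pvRoot_fix hinv h0 h1
  set q := p.set x.toNat r with hq
  have hpa : ∀ z : Int, 0 ≤ z → pvPa q z = if z = x then r else pvPa p z := pvPa_set h0 h1 r
  by_cases hxfix : pvPa p x = x
  · have hrx : r = x := pvRoot_of_fix hxfix
    have hpx : pvPa p x = x := hxfix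
    have hqp : q = p := by
      apply List.ext_getElem (by simp [hq])
      intro k hk hk'
      simp only [hq, List.getElem_set]
      split
      · next heq =>
        have : pvPa p x = p[k] := by
          rw [pvPa, PySem.List.pyGetD_eq_getElem _ 0 h0 h1]
          congr 1
        rw [hrx, ← this]
        exact hpx.symm
      · rfl
    rw [hqp]
    exact ⟨hinv, fun z _ _ => rfl⟩
  · have hrnex : r ≠ x := fun h => hxfix (h ▸ hfixr)
    have hRroot : R r < R x := by
      rw [hrdef, pvRoot_eq_chase_pa h0 h1 hxfix]
      obtain ⟨ha, hb⟩ := pvPa_range hr h0 h1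
      exact Nat.lt_of_le_of_lt (pvR_chase_le hr R hR _ _ ha hb) (hR x h0 h1 hxfix)
    have hrq : pvInRange q := by
      intro k hk
      have hk2 : k < p.length := by
        have := hk
        simp only [hq, List.length_set] at this
        exact this
      have hval : q[k] = if x.toNat = k then r else p[k] := by
        simp [hq, List.getElem_set]
      have hlq : (q.length : Int) = (p.length : Int) := by simp [hq]
      rw [hval, hlq]
      split
      · exact ⟨hr0, hr1⟩
      · exact hr k hk2
    have hRq : ∀ z : Int, 0 ≤ z → z < (q.length : Int) → pvPa q z ≠ z → R (pvPa q z) < R z := by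
      intro z hz0 hz1 hzne
      have hz1' : z < (p.length : Int) := by
        simp only [hq, List.length_set] at hz1
        exact hz1
      rw [hpa z hz0] at hzne ⊢
      by_cases hzx : z = x
      · rw [if_pos hzx]
        subst hzx
        exact hRroot
      · rw [if_neg hzx] at hzne ⊢
        exact hR z hz0 hz1' hzne
    have hinvq : pvInv q := ⟨hrq, R, hRq⟩
    refine ⟨hinvq, ?_⟩
    have main : ∀ m, ∀ z : Int, 0 ≤ z → z < (p.length : Int) → R z = m →
        pvRoot q z = pvRoot p z := by
      intro m
      induction m using Nat.strong_induction_on with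
      | _ m ih =>
        intro z hz0 hz1 hRm
        by_cases hfz : pvPa q z = z
        · have hq1 : pvRoot q z = z := pvRoot_of_fix hfz
          rw [hpa z hz0] at hfz
          by_cases hzx : z = x
          · rw [if_pos hzx] at hfz
            exact absurd (hzx ▸ hfz) hrnex
          · rw [if_neg hzx] at hfz
            rw [hq1, pvRoot_of_fix hfz]
        · have hz1q : z < (q.length : Int) := by
            simp only [hq, List.length_set]
            exact hz1
          have hstep : pvRoot q z = pvRoot q (pvPa q z) :=
            (pvRoot_pa hinvq hz0 hz1q hfz).symm
          rw [hpa z hz0] at hstep hfz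
          by_cases hzx : z = x
          · subst hzx
            rw [if_pos rfl] at hstep
            have hfr : pvPa q r = r := by
              rw [hpa r hr0, if_neg hrnex]
              exact hfixr
            rw [hstep, pvRoot_of_fix hfr]
          · rw [if_neg hzx] at hstep hfz
            obtain ⟨ha, hb⟩ := pvPa_range hr hz0 hz1
            have hlt : R (pvPa p z) < m := hRm ▸ hR z hz0 hz1 hfz
            rw [hstep, ih _ hlt (pvPa p z) ha hb rfl, pvRoot_pa hinv hz0 hz1 hfz]
    intro z hz0 hz1
    exact main (R z) z hz0 hz1 rfl

-- link step: for roots rx ≠ ry, p[rx] := ry merges the two classes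
lemma pvLink {p : List Int} (hp : pvInv p) {rx ry : Int} (hx0 : 0 ≤ rx)
    (hx1 : rx < (p.length : Int)) (hy0 : 0 ≤ ry) (hy1 : ry < (p.length : Int))
    (hrx : pvPa p rx = rx) (hry : pvPa p ry = ry) :
    pvInv (p.set rx.toNat ry) ∧
      ∀ z : Int, 0 ≤ z → z < (p.length : Int) →
        pvRoot (p.set rx.toNat ry) z = if pvRoot p z = rx then ry else pvRoot p z := by
  obtain ⟨hr, R, hR⟩ := hp
  have hinv : pvInv p := ⟨hr, R, hR⟩
  set q := p.set rx.toNat ry with hq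
  have hpa : ∀ z : Int, 0 ≤ z → pvPa q z = if z = rx then ry else pvPa p z :=
    pvPa_set hx0 hx1 ry
  have hlq : (q.length : Int) = (p.length : Int) := by simp [hq]
  by_cases hxy : rx = ry
  · have hqp : q = p := by
      apply List.ext_getElem (by simp [hq])
      intro k hk hk'
      simp only [hq, List.getElem_set]
      split
      · next heq =>
        have : pvPa p rx = p[k] := by
          rw [pvPa, PySem.List.pyGetD_eq_getElem _ 0 hx0 hx1]
          congr 1
        rw [← hxy, ← this]
        exact hrx.symm
      · rfl
    rw [hqp]
    refine ⟨hinv, fun z hz0 hz1 => ?_⟩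
    by_cases h : pvRoot p z = rx
    · rw [if_pos h, h, hxy]
    · rw [if_neg h]
  · have hrootrx : pvRoot p rx = rx := pvRoot_of_fix hrx
    have hrootry : pvRoot p ry = ry := pvRoot_of_fix hry
    set R' : Int → Nat := fun z => if pvRoot p z = rx then R z + R ry + 1 else R z with hR'
    have hrq : pvInRange q := by
      intro k hk
      have hk2 : k < p.length := by
        simp only [hq, List.length_set] at hk
        exact hk
      have hval : q[k] = if rx.toNat = k then ry else p[k] := by
        simp [hq, List.getElem_set]
      rw [hval, hlq]
      split
      · exact ⟨hy0, hy1⟩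
      · exact hr k hk2
    have hRq : ∀ z : Int, 0 ≤ z → z < (q.length : Int) → pvPa q z ≠ z →
        R' (pvPa q z) < R' z := by
      intro z hz0 hz1 hzne
      have hz1' : z < (p.length : Int) := by rwa [hlq] at hz1
      rw [hpa z hz0] at hzne ⊢
      by_cases hzx : z = rx
      · subst hzx
        rw [if_pos rfl] at hzne ⊢
        simp only [hR']
        rw [if_pos hrootrx, if_neg (by rw [hrootry]; exact fun h => hxy h.symm)]
        omega
      · rw [if_neg hzx] at hzne ⊢
        have hstep : pvRoot p (pvPa p z) = pvRoot p z := pvRoot_pa hinv hz0 hz1' hzne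
        have hbase := hR z hz0 hz1' hzne
        simp only [hR', hstep]
        split
        · omega
        · omega
    have hinvq : pvInv q := ⟨hrq, R', hRq⟩
    refine ⟨hinvq, ?_⟩
    have main : ∀ m, ∀ z : Int, 0 ≤ z → z < (p.length : Int) → R z = m →
        pvRoot q z = if pvRoot p z = rx then ry else pvRoot p z := by
      intro m
      induction m using Nat.strong_induction_on with
      | _ m ih =>
        intro z hz0 hz1 hRm
        by_cases hfz : pvPa q z = z
        · have hq1 : pvRoot q z = z := pvRoot_of_fix hfz
          rw [hpa z hz0] at hfz
          by_cases hzx : z = rx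
          · rw [if_pos hzx] at hfz
            rw [hzx] at hfz
            exact absurd hfz.symm hxy
          · rw [if_neg hzx] at hfz
            rw [hq1, pvRoot_of_fix hfz, if_neg hzx]
        · have hz1q : z < (q.length : Int) := by rwa [hlq]
          have hstep : pvRoot q z = pvRoot q (pvPa q z) :=
            (pvRoot_pa hinvq hz0 hz1q hfz).symm
          rw [hpa z hz0] at hstep hfz
          by_cases hzx : z = rx
          · subst hzx
            rw [if_pos rfl] at hstep
            have hfr : pvPa q ry = ry := by
              rw [hpa ry hy0, if_neg (fun h => hxy h.symm)]
              exact hry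
            rw [hstep, pvRoot_of_fix hfr, hrootrx, if_pos rfl]
          · rw [if_neg hzx] at hstep hfz
            obtain ⟨ha, hb⟩ := pvPa_range hr hz0 hz1
            have hlt : R (pvPa p z) < m := hRm ▸ hR z hz0 hz1 hfz
            rw [hstep, ih _ hlt _ ha hb rfl, pvRoot_pa hinv hz0 hz1 hfz]
    intro z hz0 hz1
    exact main (R z) z hz0 hz1 rfl

-- A's find: returns the root, keeps the length, the invariant and every root
lemma pvFindA_spec : ∀ (fuel : Nat) (p : List Int) (x : Int), pvInv p → 0 ≤ x →
    x < (p.length : Int) → pvPa p (pvChase p fuel x) = pvChase p fuel x →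
    (pvFindA p x fuel).2 = pvRoot p x ∧ (pvFindA p x fuel).1.length = p.length ∧
      pvInv (pvFindA p x fuel).1 ∧
      ∀ z : Int, 0 ≤ z → z < (p.length : Int) →
        pvRoot (pvFindA p x fuel).1 z = pvRoot p z := by
  intro fuel
  induction fuel with
  | zero =>
    intro p x hp h0 h1 hfix
    have hfx : pvPa p x = x := hfix
    exact ⟨(pvRoot_of_fix hfx).symm, rfl, hp, fun z _ _ => rfl⟩
  | succ fuel ih =>
    intro p x hp h0 h1 hfix
    have hpadef : PySem.List.pyGetD p x 0 = pvPa p x := rfl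
    by_cases hfx : pvPa p x = x
    · have hunf : pvFindA p x (fuel + 1) = (p, x) := by
        rw [pvFindA]
        simp only [hpadef, if_pos hfx]
      rw [hunf]
      exact ⟨(pvRoot_of_fix hfx).symm, rfl, hp, fun z _ _ => rfl⟩
    · have hpx := pvPa_range hp.1 h0 h1
      have hfix' : pvPa p (pvChase p fuel (pvPa p x)) = pvChase p fuel (pvPa p x) := by
        have he : pvChase p (fuel + 1) x = pvChase p fuel (pvPa p x) := by
          rw [pvChase, if_neg hfx]
        rwa [he] at hfix
      obtain ⟨ihr, ihlen, ihinv, ihroot⟩ := ih p (pvPa p x) hp hpx.1 hpx.2 hfix'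
      have hunf : pvFindA p x (fuel + 1) =
          ((pvFindA p (pvPa p x) fuel).1.set x.toNat (pvFindA p (pvPa p x) fuel).2,
            (pvFindA p (pvPa p x) fuel).2) := by
        rw [pvFindA]
        simp only [hpadef, if_neg hfx]
      set p1 := (pvFindA p (pvPa p x) fuel).1 with hp1
      set r := (pvFindA p (pvPa p x) fuel).2 with hrr
      have hroot_x : pvRoot p (pvPa p x) = pvRoot p x := pvRoot_pa hp h0 h1 hfx
      have hr_p1 : r = pvRoot p1 x := by
        rw [ihr, hroot_x, ← ihroot x h0 h1]
      have h1' : x < (p1.length : Int) := by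
        rw [ihlen]
        exact h1
      obtain ⟨hinv2, hroots2⟩ := pvCompress ihinv h0 h1'
      rw [hunf]
      refine ⟨ihr.trans hroot_x, by simp [ihlen], ?_, ?_⟩
      · rw [hr_p1]
        exact hinv2
      · intro z hz0 hz1
        have hz1' : z < (p1.length : Int) := by
          rw [ihlen]
          exact hz1
        rw [hr_p1, hroots2 z hz0 hz1', ihroot z hz0 hz1]

-- A's join: merges the class of x into the class of y
lemma pvJoinA_spec {p : List Int} (wt : List Int) {x y : Int} (hp : pvInv p) (hx0 : 0 ≤ x)
    (hx1 : x < (p.length : Int)) (hy0 : 0 ≤ y) (hy1 : y < (p.length : Int)) :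
    (pvJoinA p wt x y).1.length = p.length ∧ pvInv (pvJoinA p wt x y).1 ∧
      ∀ z : Int, 0 ≤ z → z < (p.length : Int) →
        pvRoot (pvJoinA p wt x y).1 z =
          if pvRoot p z = pvRoot p x then pvRoot p y else pvRoot p z := by
  have hfixx : pvPa p (pvChase p p.length x) = pvChase p p.length x := pvRoot_fix hp hx0 hx1
  obtain ⟨h1r, h1len, h1inv, h1root⟩ := pvFindA_spec p.length p x hp hx0 hx1 hfixx
  set p1 := (pvFindA p x p.length).1 with hp1def
  set rx := (pvFindA p x p.length).2 with hrxdef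
  have hy1' : y < (p1.length : Int) := by
    rw [h1len]
    exact hy1
  have hfixy : pvPa p1 (pvChase p1 p1.length y) = pvChase p1 p1.length y :=
    pvRoot_fix h1inv hy0 hy1'
  obtain ⟨h2r, h2len, h2inv, h2root⟩ := pvFindA_spec p1.length p1 y h1inv hy0 hy1' hfixy
  set p2 := (pvFindA p1 y p1.length).1 with hp2def
  set ry := (pvFindA p1 y p1.length).2 with hrydef
  have hlen2 : p2.length = p.length := by rw [h2len, h1len]
  have hrx : rx = pvRoot p x := h1r
  have hry : ry = pvRoot p y := by rw [h2r, h1root y hy0 hy1]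
  have hrx0 : 0 ≤ pvRoot p x := (pvChase_range hp.1 p.length hx0 hx1).1
  have hrx1 : pvRoot p x < (p.length : Int) := (pvChase_range hp.1 p.length hx0 hx1).2
  have hry0 : 0 ≤ pvRoot p y := (pvChase_range hp.1 p.length hy0 hy1).1
  have hry1 : pvRoot p y < (p.length : Int) := (pvChase_range hp.1 p.length hy0 hy1).2
  have hrootp2 : ∀ z : Int, 0 ≤ z → z < (p.length : Int) → pvRoot p2 z = pvRoot p z := by
    intro z hz0 hz1
    have hz1' : z < (p1.length : Int) := by
      rw [h1len]
      exact hz1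
    rw [h2root z hz0 hz1', h1root z hz0 hz1]
  have hfx2 : pvPa p2 (pvRoot p x) = pvRoot p x := by
    have hz1' : pvRoot p x < (p2.length : Int) := by
      rw [hlen2]
      exact hrx1
    have hf := pvRoot_fix h2inv hrx0 hz1'
    have hidem : pvRoot p (pvRoot p x) = pvRoot p x := pvRoot_of_fix (pvRoot_fix hp hx0 hx1)
    rwa [hrootp2 _ hrx0 hrx1, hidem] at hf
  have hfy2 : pvPa p2 (pvRoot p y) = pvRoot p y := by
    have hz1' : pvRoot p y < (p2.length : Int) := by
      rw [hlen2]
      exact hry1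
    have hf := pvRoot_fix h2inv hry0 hz1'
    have hidem : pvRoot p (pvRoot p y) = pvRoot p y := pvRoot_of_fix (pvRoot_fix hp hy0 hy1)
    rwa [hrootp2 _ hry0 hry1, hidem] at hf
  have hrx1' : pvRoot p x < (p2.length : Int) := by
    rw [hlen2]
    exact hrx1
  have hry1' : pvRoot p y < (p2.length : Int) := by
    rw [hlen2]
    exact hry1
  obtain ⟨hinvq, hrootsq⟩ := pvLink h2inv hrx0 hrx1' hry0 hry1' hfx2 hfy2
  have hJ : (pvJoinA p wt x y).1 = p2.set (pvRoot p x).toNat (pvRoot p y) := by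
    show p2.set rx.toNat ry = _
    rw [hrx, hry]
  rw [hJ]
  refine ⟨by simp [hlen2], hinvq, ?_⟩
  intro z hz0 hz1
  have hz1' : z < (p2.length : Int) := by
    rw [hlen2]
    exact hz1
  rw [hrootsq z hz0 hz1', hrootp2 z hz0 hz1]

-- ---- initial union-find state ----

lemma pvInit_len (n : Nat) : (PySem.List.pyRange 0 (n : Int) 1).length = n := by
  rw [PySem.List.pyRange_zero_natCast]
  simp

lemma pvInit_fix (n : Nat) {z : Int} (h0 : 0 ≤ z)
    (h1 : z < ((PySem.List.pyRange 0 (n : Int) 1).length : Int)) :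
    pvPa (PySem.List.pyRange 0 (n : Int) 1) z = z := by
  have hzn : z.toNat < n := by
    rw [pvInit_len] at h1
    omega
  rw [pvPa, PySem.List.pyGetD_of_nonneg _ _ h0, PySem.List.pyRange_zero_natCast,
    List.getD_eq_getElem?_getD]
  simp [hzn]
  omega

lemma pvInit_inv (n : Nat) : pvInv (PySem.List.pyRange 0 (n : Int) 1) := by
  constructor
  · intro k hk
    have hk' : k < n := by
      rw [← pvInit_len n]
      exact hk
    have hval : (PySem.List.pyRange 0 (n : Int) 1)[k] = (k : Int) := by
      rw [List.getElem_eq_iff, PySem.List.pyRange_zero_natCast]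
      simp [hk']
    rw [hval, pvInit_len]
    exact ⟨by positivity, by exact_mod_cast hk'⟩
  · refine ⟨fun _ => 0, fun x h0 h1 hne => absurd (pvInit_fix n h0 h1) hne⟩

-- ---- parity connectivity: walks with their length parity ----

def pvIsEdge (E : List (Int × Int × Int)) (a b : Int) : Prop :=
  ∃ d, (d, a, b) ∈ E ∨ (d, b, a) ∈ E

inductive pvConn (E : List (Int × Int × Int)) : Int → Int → Bool → Prop
  | refl (x : Int) : pvConn E x x false
  | step {x y z : Int} {p : Bool} : pvConn E x y p → pvIsEdge E y z → pvConn E x z (!p)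

-- the graph is bipartite iff it has no odd closed walk
def pvBip (E : List (Int × Int × Int)) : Prop := ∀ x, ¬ pvConn E x x true

lemma pvIsEdge_symm {E : List (Int × Int × Int)} {a b : Int} (h : pvIsEdge E a b) :
    pvIsEdge E b a := by
  obtain ⟨d, h⟩ := h
  exact ⟨d, h.symm⟩

lemma pvConn_single {E : List (Int × Int × Int)} {a b : Int} (h : pvIsEdge E a b) :
    pvConn E a b true := by
  have := pvConn.step (pvConn.refl (E := E) a) h
  simpa using this

lemma pvConn_trans {E : List (Int × Int × Int)} {x y z : Int} {p q : Bool}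
    (h1 : pvConn E x y p) (h2 : pvConn E y z q) : pvConn E x z (p ^^ q) := by
  induction h2 with
  | refl => simpa using h1
  | step h e ih =>
    rename_i a b p'
    have := pvConn.step ih e
    have hb : (!(p ^^ p')) = (p ^^ !p') := by cases p <;> cases p' <;> rfl
    rwa [hb] at this

lemma pvConn_symm {E : List (Int × Int × Int)} {x y : Int} {p : Bool}
    (h : pvConn E x y p) : pvConn E y x p := by
  induction h with
  | refl => exact pvConn.refl _
  | step h e ih =>
    rename_i b c p'
    have h1 : pvConn E c b true := pvConn_single (pvIsEdge_symm e)
    have := pvConn_trans h1 ih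
    have hb : (true ^^ p') = (!p') := by cases p' <;> rfl
    rwa [hb] at this

lemma pvConn_mono {E E' : List (Int × Int × Int)} (hsub : ∀ e ∈ E, e ∈ E')
    {x y : Int} {p : Bool} (h : pvConn E x y p) : pvConn E' x y p := by
  induction h with
  | refl => exact pvConn.refl _
  | step h e ih =>
    obtain ⟨d, he⟩ := e
    exact pvConn.step ih ⟨d, he.imp (hsub _) (hsub _)⟩

lemma pvConn_isolated {E : List (Int × Int × Int)} {i : Int}
    (hiso : ∀ y, ¬ pvIsEdge E i y) {x : Int} {p : Bool} (h : pvConn E x i p) :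
    x = i ∧ p = false := by
  generalize hy : i = y at h
  subst hy
  induction h with
  | refl => exact ⟨rfl, rfl⟩
  | step h e ih => exact absurd (pvIsEdge_symm e) (hiso _)


-- splice: adding one edge (i, j) to a bipartite graph, walks decompose at that edge
lemma pvConn_append {E : List (Int × Int × Int)} {d i j : Int} (hB : pvBip E)
    {x y : Int} {p : Bool} :
    pvConn (E ++ [(d, i, j)]) x y p ↔
      pvConn E x y p ∨ (∃ q, pvConn E x i q ∧ pvConn E j y (!(q ^^ p))) ∨
        (∃ q, pvConn E x j q ∧ pvConn E i y (!(q ^^ p))) := by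
  constructor
  · intro h
    induction h with
    | refl => exact Or.inl (pvConn.refl _)
    | step h' e ih =>
      rename_i a b p'
      obtain ⟨d', hd'⟩ := e
      have hcase : pvIsEdge E a b ∨ (a = i ∧ b = j) ∨ (a = j ∧ b = i) := by
        rcases hd' with hm | hm <;> rcases List.mem_append.mp hm with h1 | h1
        · exact Or.inl ⟨d', Or.inl h1⟩
        · have h2 := Prod.ext_iff.mp (Prod.ext_iff.mp (List.mem_singleton.mp h1)).2
          exact Or.inr (Or.inl ⟨h2.1, h2.2⟩)
        · exact Or.inl ⟨d', Or.inr h1⟩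
        · have h2 := Prod.ext_iff.mp (Prod.ext_iff.mp (List.mem_singleton.mp h1)).2
          exact Or.inr (Or.inr ⟨h2.2, h2.1⟩)
      rcases hcase with hold | ⟨rfl, rfl⟩ | ⟨rfl, rfl⟩
      · rcases ih with h1 | ⟨q, hxi, hja⟩ | ⟨q, hxj, hia⟩
        · exact Or.inl (pvConn.step h1 hold)
        · refine Or.inr (Or.inl ⟨q, hxi, ?_⟩)
          have := pvConn.step hja hold
          have hb : (!(!(q ^^ p'))) = (!(q ^^ !p')) := by cases q <;> cases p' <;> rfl
          rwa [hb] at this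
        · refine Or.inr (Or.inr ⟨q, hxj, ?_⟩)
          have := pvConn.step hia hold
          have hb : (!(!(q ^^ p'))) = (!(q ^^ !p')) := by cases q <;> cases p' <;> rfl
          rwa [hb] at this
      · -- the new edge, used as (i, j)
        rcases ih with h1 | ⟨q, hxi, hji⟩ | ⟨q, hxj, hii⟩
        · refine Or.inr (Or.inl ⟨p', h1, ?_⟩)
          have hb : (!(p' ^^ !p')) = false := by cases p' <;> rfl
          rw [hb]; exact pvConn.refl _
        · have h2 := pvConn_trans hxi (pvConn_symm hji)
          have hb : (q ^^ !(q ^^ p')) = (!p') := by cases q <;> cases p' <;> rfl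
          rw [hb] at h2
          exact Or.inl h2
        · by_cases hq : (!(q ^^ p')) = true
          · exact absurd (hq ▸ hii) (hB a)
          · have hq' : q = !p' := by cases q <;> cases p' <;> simp_all
            exact Or.inl (hq' ▸ hxj)
      · -- the new edge, used as (j, i)
        rcases ih with h1 | ⟨q, hxi, hjj⟩ | ⟨q, hxj, hij⟩
        · refine Or.inr (Or.inr ⟨p', h1, ?_⟩)
          have hb : (!(p' ^^ !p')) = false := by cases p' <;> rfl
          rw [hb]; exact pvConn.refl _
        · by_cases hq : (!(q ^^ p')) = true
          · exact absurd (hq ▸ hjj) (hB a)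
          · have hq' : q = !p' := by cases q <;> cases p' <;> simp_all
            exact Or.inl (hq' ▸ hxi)
        · have h2 := pvConn_trans hxj (pvConn_symm hij)
          have hb : (q ^^ !(q ^^ p')) = (!p') := by cases q <;> cases p' <;> rfl
          rw [hb] at h2
          exact Or.inl h2
  · intro h
    have hedge : pvIsEdge (E ++ [(d, i, j)]) i j :=
      ⟨d, Or.inl (List.mem_append.mpr (Or.inr (List.mem_singleton.mpr rfl)))⟩
    have hsub : ∀ e ∈ E, e ∈ E ++ [(d, i, j)] := fun e he => List.mem_append.mpr (Or.inl he)
    rcases h with h | ⟨q, hxi, hjy⟩ | ⟨q, hxj, hiy⟩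
    · exact pvConn_mono hsub h
    · have h1 : pvConn (E ++ [(d, i, j)]) x j (!q) := pvConn.step (pvConn_mono hsub hxi) hedge
      have h2 := pvConn_trans h1 (pvConn_mono hsub hjy)
      have hb : (!q ^^ !(q ^^ p)) = p := by cases q <;> cases p <;> rfl
      rwa [hb] at h2
    · have h1 : pvConn (E ++ [(d, i, j)]) x i (!q) :=
        pvConn.step (pvConn_mono hsub hxj) (pvIsEdge_symm hedge)
      have h2 := pvConn_trans h1 (pvConn_mono hsub hiy)
      have hb : (!q ^^ !(q ^^ p)) = p := by cases q <;> cases p <;> rfl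
      rwa [hb] at h2


-- A's loop invariant: the union-find classes are exactly even-parity connectivity of the
-- processed prefix, opp stores an odd-connected partner for every touched node, and the
-- prefix is bipartite
def pvRangeOK (n : Int) (E : List (Int × Int × Int)) : Prop :=
  ∀ e ∈ E, 0 ≤ e.2.1 ∧ e.2.1 < n ∧ 0 ≤ e.2.2 ∧ e.2.2 < n

def pvInvA (n : Int) (E : List (Int × Int × Int)) (p : List Int)
    (opp : PySem.Dict Int Int) : Prop :=
  pvInv p ∧ (p.length : Int) = n ∧
  (∀ x v, opp.get? x = some v → pvConn E x v true ∧ 0 ≤ v ∧ v < n) ∧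
  (∀ x y, pvIsEdge E x y → (opp.get? x).isSome) ∧
  pvBip E ∧
  (∀ x y, 0 ≤ x → x < n → 0 ≤ y → y < n →
    (pvRoot p x = pvRoot p y ↔ pvConn E x y false))

-- a conflict-free new edge keeps the graph bipartite
lemma pvBip_append {E : List (Int × Int × Int)} {d i j : Int} (hB : pvBip E)
    (hnoc : ¬ pvConn E i j false) : pvBip (E ++ [(d, i, j)]) := by
  intro x hx
  rcases (pvConn_append hB).mp hx with h1 | ⟨q, hxi, hjx⟩ | ⟨q, hxj, hix⟩
  · exact hB x h1
  · have hb : (!(q ^^ true)) = q := by cases q <;> rfl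
    rw [hb] at hjx
    have h2 := pvConn_trans (pvConn_symm hxi) (pvConn_symm hjx)
    have hb2 : (q ^^ q) = false := by cases q <;> rfl
    rw [hb2] at h2
    exact hnoc h2
  · have hb : (!(q ^^ true)) = q := by cases q <;> rfl
    rw [hb] at hix
    have h2 := pvConn_trans hix hxj
    have hb2 : (q ^^ q) = false := by cases q <;> rfl
    rw [hb2] at h2
    exact hnoc h2

-- a conflicting new edge closes an odd walk
lemma pvNotBip_append {E : List (Int × Int × Int)} {d i j : Int}
    (hc : pvConn E i j false) : ¬ pvBip (E ++ [(d, i, j)]) := by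
  intro hB
  have hsub : ∀ e ∈ E, e ∈ E ++ [(d, i, j)] := fun e he => List.mem_append.mpr (Or.inl he)
  have hedge : pvIsEdge (E ++ [(d, i, j)]) j i :=
    ⟨d, Or.inr (List.mem_append.mpr (Or.inr (List.mem_singleton.mpr rfl)))⟩
  have h2 := pvConn.step (pvConn_mono hsub hc) hedge
  exact hB i (by simpa using h2)

-- join(a, b) merges exactly the classes of a and b
lemma pvRootEq_join {p : List Int} (wt : List Int) {a b : Int} (hp : pvInv p)
    (ha0 : 0 ≤ a) (ha1 : a < (p.length : Int)) (hb0 : 0 ≤ b) (hb1 : b < (p.length : Int))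
    {x y : Int} (hx0 : 0 ≤ x) (hx1 : x < (p.length : Int)) (hy0 : 0 ≤ y)
    (hy1 : y < (p.length : Int)) :
    pvRoot (pvJoinA p wt a b).1 x = pvRoot (pvJoinA p wt a b).1 y ↔
      (pvRoot p x = pvRoot p y ∨
        (pvRoot p x = pvRoot p a ∧ pvRoot p y = pvRoot p b) ∨
        (pvRoot p x = pvRoot p b ∧ pvRoot p y = pvRoot p a)) := by
  obtain ⟨hlen, hinv, hroots⟩ := pvJoinA_spec wt hp ha0 ha1 hb0 hb1
  rw [hroots x hx0 hx1, hroots y hy0 hy1]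
  by_cases hxa : pvRoot p x = pvRoot p a <;> by_cases hya : pvRoot p y = pvRoot p a
  · simp only [if_pos hxa, if_pos hya]
    exact ⟨fun _ => Or.inl (hxa.trans hya.symm), fun _ => trivial⟩
  · simp only [if_pos hxa, if_neg hya]
    constructor
    · intro h; exact Or.inr (Or.inl ⟨hxa, h.symm⟩)
    · rintro (h | ⟨h1, h2⟩ | ⟨h1, h2⟩)
      · exact absurd (h.symm.trans hxa) hya
      · exact h2.symm
      · exact absurd h2 hya
  · simp only [if_neg hxa, if_pos hya]
    constructor
    · intro h; exact Or.inr (Or.inr ⟨h, hya⟩)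
    · rintro (h | ⟨h1, h2⟩ | ⟨h1, h2⟩)
      · exact absurd (h.trans hya) hxa
      · exact absurd h1 hxa
      · exact h1
  · simp only [if_neg hxa, if_neg hya]
    constructor
    · exact fun h => Or.inl h
    · rintro (h | ⟨h1, h2⟩ | ⟨h1, h2⟩)
      · exact h
      · exact absurd h1 hxa
      · exact absurd h2 hya

-- under bipartiteness, an odd partner turns odd reachability into even reachability
lemma pvOdd_iff {E : List (Int × Int × Int)} {i a x : Int}
    (hia : pvConn E i a true) :
    pvConn E x i true ↔ pvConn E x a false := by
  constructor
  · intro h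
    have h2 := pvConn_trans h hia
    simpa using h2
  · intro h
    have h2 := pvConn_trans h (pvConn_symm hia)
    simpa using h2


lemma pvIsEdge_append {E : List (Int × Int × Int)} {d i j x y : Int} :
    pvIsEdge (E ++ [(d, i, j)]) x y ↔
      pvIsEdge E x y ∨ (x = i ∧ y = j) ∨ (x = j ∧ y = i) := by
  constructor
  · rintro ⟨d', hm | hm⟩ <;> rcases List.mem_append.mp hm with h1 | h1
    · exact Or.inl ⟨d', Or.inl h1⟩
    · have h2 := Prod.ext_iff.mp (Prod.ext_iff.mp (List.mem_singleton.mp h1)).2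
      exact Or.inr (Or.inl ⟨h2.1, h2.2⟩)
    · exact Or.inl ⟨d', Or.inr h1⟩
    · have h2 := Prod.ext_iff.mp (Prod.ext_iff.mp (List.mem_singleton.mp h1)).2
      exact Or.inr (Or.inr ⟨h2.2, h2.1⟩)
  · rintro (⟨d', hm⟩ | ⟨rfl, rfl⟩ | ⟨rfl, rfl⟩)
    · exact ⟨d', hm.imp (fun h => List.mem_append.mpr (Or.inl h))
        (fun h => List.mem_append.mpr (Or.inl h))⟩
    · exact ⟨d, Or.inl (List.mem_append.mpr (Or.inr (List.mem_singleton.mpr rfl)))⟩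
    · exact ⟨d, Or.inr (List.mem_append.mpr (Or.inr (List.mem_singleton.mpr rfl)))⟩

-- one conflict-free step of A's sweep preserves the invariant (p2 is the parent array
-- after the two path-compressing finds; the joins are then performed on it)
set_option maxHeartbeats 1000000 in
lemma pvStepA {n : Int} {E : List (Int × Int × Int)} {p p2 wt : List Int}
    {opp : PySem.Dict Int Int} {d i j : Int}
    (hInv : pvInvA n E p opp)
    (hp2 : pvInv p2) (hlen2 : (p2.length : Int) = n)
    (hroots2 : ∀ z, 0 ≤ z → z < n → pvRoot p2 z = pvRoot p z)
    (hi0 : 0 ≤ i) (hi1 : i < n) (hj0 : 0 ≤ j) (hj1 : j < n)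
    (hnoc : ¬ pvConn E i j false) :
    pvInvA n (E ++ [(d, i, j)])
      (match opp.get? j with
        | some oj => (pvJoinA (match opp.get? i with
              | some oi => pvJoinA p2 wt oi j
              | none => (p2, wt)).1
            (match opp.get? i with
              | some oi => pvJoinA p2 wt oi j
              | none => (p2, wt)).2 oj i).1
        | none => (match opp.get? i with
              | some oi => pvJoinA p2 wt oi j
              | none => (p2, wt)).1)
      ((opp.insert i j).insert j i) := by
  obtain ⟨hpInv, hplen, hOpp, hTouch, hB, hRootIff⟩ := hInv
  have hB' : pvBip (E ++ [(d, i, j)]) := pvBip_append hB hnoc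
  -- R is root-equality in p (equivalently p2), the even-connectivity of E
  set R : Int → Int → Prop := fun x y => pvRoot p x = pvRoot p y with hRdef
  have hRiff : ∀ x y, 0 ≤ x → x < n → 0 ≤ y → y < n → (R x y ↔ pvConn E x y false) :=
    hRootIff
  -- the new opp
  have hopp' : ∀ x : Int, ((opp.insert i j).insert j i).get? x =
      if x = j then some i else if x = i then some j else opp.get? x := by
    intro x
    rw [PySem.Dict.get?_insert, PySem.Dict.get?_insert]
  have hsub : ∀ e ∈ E, e ∈ E ++ [(d, i, j)] := fun e he => List.mem_append.mpr (Or.inl he)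
  have hedge : pvIsEdge (E ++ [(d, i, j)]) i j :=
    ⟨d, Or.inl (List.mem_append.mpr (Or.inr (List.mem_singleton.mpr rfl)))⟩
  -- opp components of the new invariant (independent of the joins)
  have hOpp' : ∀ x v, ((opp.insert i j).insert j i).get? x = some v →
      pvConn (E ++ [(d, i, j)]) x v true ∧ 0 ≤ v ∧ v < n := by
    intro x v hv
    rw [hopp'] at hv
    by_cases hxj : x = j
    · rw [if_pos hxj] at hv
      cases hv
      subst hxj
      exact ⟨pvConn_single (pvIsEdge_symm hedge), hi0, hi1⟩
    · rw [if_neg hxj] at hv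
      by_cases hxi : x = i
      · rw [if_pos hxi] at hv
        cases hv
        subst hxi
        exact ⟨pvConn_single hedge, hj0, hj1⟩
      · rw [if_neg hxi] at hv
        obtain ⟨hc, hv0, hv1⟩ := hOpp x v hv
        exact ⟨pvConn_mono hsub hc, hv0, hv1⟩
  have hTouch' : ∀ x y, pvIsEdge (E ++ [(d, i, j)]) x y →
      (((opp.insert i j).insert j i).get? x).isSome := by
    intro x y he
    rw [hopp']
    by_cases hxj : x = j
    · rw [if_pos hxj]; rfl
    · rw [if_neg hxj]
      by_cases hxi : x = i
      · rw [if_pos hxi]; rfl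
      · rw [if_neg hxi]
        rcases pvIsEdge_append.mp he with hold | ⟨h1, _⟩ | ⟨h1, _⟩
        · exact hTouch x y hold
        · exact absurd h1 hxi
        · exact absurd h1 hxj
  -- the even-connectivity of the extended graph, spliced and with q enumerated
  have hsplice : ∀ x y, pvConn (E ++ [(d, i, j)]) x y false ↔
      pvConn E x y false ∨
        ((pvConn E x i false ∧ pvConn E j y true) ∨ (pvConn E x i true ∧ pvConn E j y false)) ∨
        ((pvConn E x j false ∧ pvConn E i y true) ∨ (pvConn E x j true ∧ pvConn E i y false)) := by
    intro x y
    rw [pvConn_append hB]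
    constructor
    · rintro (h | ⟨q, h1, h2⟩ | ⟨q, h1, h2⟩)
      · exact Or.inl h
      · cases q
        · exact Or.inr (Or.inl (Or.inl ⟨h1, by simpa using h2⟩))
        · exact Or.inr (Or.inl (Or.inr ⟨h1, by simpa using h2⟩))
      · cases q
        · exact Or.inr (Or.inr (Or.inl ⟨h1, by simpa using h2⟩))
        · exact Or.inr (Or.inr (Or.inr ⟨h1, by simpa using h2⟩))
    · rintro (h | (⟨h1, h2⟩ | ⟨h1, h2⟩) | (⟨h1, h2⟩ | ⟨h1, h2⟩))
      · exact Or.inl h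
      · exact Or.inr (Or.inl ⟨false, h1, by simpa using h2⟩)
      · exact Or.inr (Or.inl ⟨true, h1, by simpa using h2⟩)
      · exact Or.inr (Or.inr ⟨false, h1, by simpa using h2⟩)
      · exact Or.inr (Or.inr ⟨true, h1, by simpa using h2⟩)
  -- even atoms always translate through the invariant
  have hXI : ∀ x, 0 ≤ x → x < n → (pvConn E x i false ↔ R x i) :=
    fun x hx0 hx1 => (hRootIff x i hx0 hx1 hi0 hi1).symm
  have hXJ : ∀ x, 0 ≤ x → x < n → (pvConn E x j false ↔ R x j) :=
    fun x hx0 hx1 => (hRootIff x j hx0 hx1 hj0 hj1).symm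
  have hJY : ∀ y, 0 ≤ y → y < n → (pvConn E j y false ↔ R y j) := by
    intro y hy0 hy1
    exact ⟨fun h => (hXJ y hy0 hy1).mp (pvConn_symm h),
      fun h => pvConn_symm ((hXJ y hy0 hy1).mpr h)⟩
  have hIY : ∀ y, 0 ≤ y → y < n → (pvConn E i y false ↔ R y i) := by
    intro y hy0 hy1
    exact ⟨fun h => (hXI y hy0 hy1).mp (pvConn_symm h),
      fun h => pvConn_symm ((hXI y hy0 hy1).mpr h)⟩
  -- odd atoms: via the stored partner, or impossible for an untouched node
  have hIsoOdd : opp.get? i = none → ∀ x, ¬ pvConn E x i true := by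
    intro hnone x h
    have hiso : ∀ y, ¬ pvIsEdge E i y := by
      intro y he
      have := hTouch i y he
      rw [hnone] at this
      exact absurd this (by simp)
    have := pvConn_isolated hiso h
    exact absurd this.2 (by simp)
  have hIsoOddJ : opp.get? j = none → ∀ x, ¬ pvConn E x j true := by
    intro hnone x h
    have hiso : ∀ y, ¬ pvIsEdge E j y := by
      intro y he
      have := hTouch j y he
      rw [hnone] at this
      exact absurd this (by simp)
    have := pvConn_isolated hiso h
    exact absurd this.2 (by simp)
  have hPartOdd : ∀ a, opp.get? i = some a → ∀ x, 0 ≤ x → x < n →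
      (pvConn E x i true ↔ R x a) := by
    intro a ha x hx0 hx1
    obtain ⟨hia, ha0, ha1⟩ := hOpp i a ha
    rw [pvOdd_iff hia]
    exact (hRootIff x a hx0 hx1 ha0 ha1).symm
  have hPartOddJ : ∀ b, opp.get? j = some b → ∀ x, 0 ≤ x → x < n →
      (pvConn E x j true ↔ R x b) := by
    intro b hb x hx0 hx1
    obtain ⟨hjb, hb0, hb1⟩ := hOpp j b hb
    rw [pvOdd_iff hjb]
    exact (hRootIff x b hx0 hx1 hb0 hb1).symm
  have hSymT : ∀ a x : Int, pvConn E a x true ↔ pvConn E x a true :=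
    fun a x => ⟨pvConn_symm, pvConn_symm⟩
  -- the per-case goal reduces to: root equality in the joined array ↔ an R-disjunction
  rcases hgj : opp.get? j with _ | b <;> rcases hgi : opp.get? i with _ | a
  · -- both untouched: no joins, classes unchanged
    refine ⟨hp2, hlen2, hOpp', hTouch', hB', ?_⟩
    intro x y hx0 hx1 hy0 hy1
    rw [hroots2 x hx0 hx1, hroots2 y hy0 hy1, hsplice]
    have h1 := hIsoOdd hgi
    have h2 := hIsoOddJ hgj
    have h2' : ∀ x, ¬ pvConn E j x true := fun x h => h2 x (pvConn_symm h)
    have h1' : ∀ x, ¬ pvConn E i x true := fun x h => h1 x (pvConn_symm h)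
    constructor
    · intro h; exact Or.inl ((hRootIff x y hx0 hx1 hy0 hy1).mp h)
    · rintro (h | (⟨u1, u2⟩ | ⟨u1, u2⟩) | (⟨u1, u2⟩ | ⟨u1, u2⟩))
      · exact (hRootIff x y hx0 hx1 hy0 hy1).mpr h
      · exact absurd u2 (h2' y)
      · exact absurd u1 (h1 x)
      · exact absurd u2 (h1' y)
      · exact absurd u1 (h2 x)
  · -- i touched (partner a), j new: the single join(a, j)
    obtain ⟨hia, ha0, ha1⟩ := hOpp i a hgi
    have hlen2' : a < (p2.length : Int) := by rw [hlen2]; exact ha1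
    have hj2' : j < (p2.length : Int) := by rw [hlen2]; exact hj1
    obtain ⟨hJlen, hJinv, _⟩ := pvJoinA_spec wt hp2 ha0 hlen2' hj0 hj2'
    refine ⟨hJinv, by rw [hJlen]; exact hlen2, hOpp', hTouch', hB', ?_⟩
    intro x y hx0 hx1 hy0 hy1
    have hx2 : x < (p2.length : Int) := by rw [hlen2]; exact hx1
    have hy2 : y < (p2.length : Int) := by rw [hlen2]; exact hy1
    rw [pvRootEq_join wt hp2 ha0 hlen2' hj0 hj2' hx0 hx2 hy0 hy2, hsplice]
    rw [hroots2 x hx0 hx1, hroots2 y hy0 hy1, hroots2 a ha0 ha1, hroots2 j hj0 hj1]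
    have t1 := hPartOdd a hgi x hx0 hx1
    have t2 := hJY y hy0 hy1
    have t3 := hXJ x hx0 hx1
    have t4 : pvConn E i y true ↔ R y a := by
      rw [hSymT i y]; exact hPartOdd a hgi y hy0 hy1
    have t5 := hIsoOddJ hgj
    have t5' : ∀ x, ¬ pvConn E j x true := fun x h => t5 x (pvConn_symm h)
    constructor
    · rintro (h | ⟨u1, u2⟩ | ⟨u1, u2⟩)
      · exact Or.inl ((hRootIff x y hx0 hx1 hy0 hy1).mp h)
      · exact Or.inr (Or.inl (Or.inr ⟨t1.mpr u1, t2.mpr u2⟩))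
      · exact Or.inr (Or.inr (Or.inl ⟨t3.mpr u1, t4.mpr u2⟩))
    · rintro (h | (⟨u1, u2⟩ | ⟨u1, u2⟩) | (⟨u1, u2⟩ | ⟨u1, u2⟩))
      · exact Or.inl ((hRootIff x y hx0 hx1 hy0 hy1).mpr h)
      · exact absurd u2 (t5' y)
      · exact Or.inr (Or.inl ⟨t1.mp u1, t2.mp u2⟩)
      · exact Or.inr (Or.inr ⟨t3.mp u1, t4.mp u2⟩)
      · exact absurd u1 (t5 x)
  · -- j touched (partner b), i new: the single join(b, i)
    obtain ⟨hjb, hb0, hb1⟩ := hOpp j b hgj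
    have hlen2' : b < (p2.length : Int) := by rw [hlen2]; exact hb1
    have hi2' : i < (p2.length : Int) := by rw [hlen2]; exact hi1
    obtain ⟨hJlen, hJinv, _⟩ := pvJoinA_spec wt hp2 hb0 hlen2' hi0 hi2'
    refine ⟨hJinv, by rw [hJlen]; exact hlen2, hOpp', hTouch', hB', ?_⟩
    intro x y hx0 hx1 hy0 hy1
    have hx2 : x < (p2.length : Int) := by rw [hlen2]; exact hx1
    have hy2 : y < (p2.length : Int) := by rw [hlen2]; exact hy1
    rw [pvRootEq_join wt hp2 hb0 hlen2' hi0 hi2' hx0 hx2 hy0 hy2, hsplice]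
    rw [hroots2 x hx0 hx1, hroots2 y hy0 hy1, hroots2 b hb0 hb1, hroots2 i hi0 hi1]
    have t1 := hXI x hx0 hx1
    have t2 : pvConn E j y true ↔ R y b := by
      rw [hSymT j y]; exact hPartOddJ b hgj y hy0 hy1
    have t3 := hPartOddJ b hgj x hx0 hx1
    have t4 := hIY y hy0 hy1
    have t5 := hIsoOdd hgi
    have t5' : ∀ x, ¬ pvConn E i x true := fun x h => t5 x (pvConn_symm h)
    constructor
    · rintro (h | ⟨u1, u2⟩ | ⟨u1, u2⟩)
      · exact Or.inl ((hRootIff x y hx0 hx1 hy0 hy1).mp h)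
      · exact Or.inr (Or.inr (Or.inr ⟨t3.mpr u1, t4.mpr u2⟩))
      · exact Or.inr (Or.inl (Or.inl ⟨t1.mpr u1, t2.mpr u2⟩))
    · rintro (h | (⟨u1, u2⟩ | ⟨u1, u2⟩) | (⟨u1, u2⟩ | ⟨u1, u2⟩))
      · exact Or.inl ((hRootIff x y hx0 hx1 hy0 hy1).mpr h)
      · exact Or.inr (Or.inr ⟨t1.mp u1, t2.mp u2⟩)
      · exact absurd u1 (t5 x)
      · exact absurd u2 (t5' y)
      · exact Or.inr (Or.inl ⟨t3.mp u1, t4.mp u2⟩)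
  · -- both touched: join(a, j) then join(b, i)
    obtain ⟨hia, ha0, ha1⟩ := hOpp i a hgi
    obtain ⟨hjb, hb0, hb1⟩ := hOpp j b hgj
    have ha2 : a < (p2.length : Int) := by rw [hlen2]; exact ha1
    have hb2 : b < (p2.length : Int) := by rw [hlen2]; exact hb1
    have hi2 : i < (p2.length : Int) := by rw [hlen2]; exact hi1
    have hj2 : j < (p2.length : Int) := by rw [hlen2]; exact hj1
    obtain ⟨hJ1len, hJ1inv, _⟩ := pvJoinA_spec wt hp2 ha0 ha2 hj0 hj2
    set p3 := (pvJoinA p2 wt a j).1 with hp3def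
    have hb3 : b < (p3.length : Int) := by rw [hJ1len]; exact hb2
    have hi3 : i < (p3.length : Int) := by rw [hJ1len]; exact hi2
    obtain ⟨hJ2len, hJ2inv, _⟩ :=
      pvJoinA_spec (pvJoinA p2 wt a j).2 hJ1inv hb0 hb3 hi0 hi3
    refine ⟨hJ2inv, by rw [hJ2len, hJ1len]; exact hlen2, hOpp', hTouch', hB', ?_⟩
    intro x y hx0 hx1 hy0 hy1
    have hx2 : x < (p2.length : Int) := by rw [hlen2]; exact hx1
    have hy2 : y < (p2.length : Int) := by rw [hlen2]; exact hy1
    have hx3 : x < (p3.length : Int) := by rw [hJ1len]; exact hx2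
    have hy3 : y < (p3.length : Int) := by rw [hJ1len]; exact hy2
    -- root equality in p3 in terms of R
    have hR3 : ∀ z w, 0 ≤ z → z < (p3.length : Int) → 0 ≤ w → w < (p3.length : Int) →
        (pvRoot p3 z = pvRoot p3 w ↔
          (R z w ∨ (R z a ∧ R w j) ∨ (R z j ∧ R w a))) := by
      intro z w hz0 hz3 hw0 hw3
      have hz2 : z < (p2.length : Int) := by rw [← hJ1len]; exact hz3
      have hw2 : w < (p2.length : Int) := by rw [← hJ1len]; exact hw3
      have hzn : z < n := by rw [← hlen2]; exact hz2
      have hwn : w < n := by rw [← hlen2]; exact hw2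
      rw [hp3def, pvRootEq_join wt hp2 ha0 ha2 hj0 hj2 hz0 hz2 hw0 hw2,
        hroots2 z hz0 hzn, hroots2 w hw0 hwn, hroots2 a ha0 ha1, hroots2 j hj0 hj1]
    -- impossible R-facts in the conflict-free bipartite prefix
    have hRbj : ¬ R b j := by
      intro h
      have hc := (hRootIff b j hb0 hb1 hj0 hj1).mp h
      have := pvConn_trans hjb hc
      exact hB j (by simpa using this)
    have hRij : ¬ R i j := fun h => hnoc ((hRootIff i j hi0 hi1 hj0 hj1).mp h)
    have hRia : ¬ R i a := by
      intro h
      have hc := (hRootIff i a hi0 hi1 ha0 ha1).mp h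
      have := pvConn_trans (pvConn_symm hc) hia
      exact hB a (by simpa using this)
    have hRba : ¬ R b a := by
      intro h
      have hc := (hRootIff b a hb0 hb1 ha0 ha1).mp h
      have h1 := pvConn_trans hia (pvConn_symm hc)
      have h2 := pvConn_trans h1 (pvConn_symm hjb)
      exact hnoc (by simpa using h2)
    have hR3xb : pvRoot p3 x = pvRoot p3 b ↔ R x b := by
      rw [hR3 x b hx0 hx3 hb0 hb3]
      constructor
      · rintro (h | ⟨_, h2⟩ | ⟨_, h2⟩)
        · exact h
        · exact absurd h2 hRbj
        · exact absurd h2 hRba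
      · exact Or.inl
    have hR3yb : pvRoot p3 y = pvRoot p3 b ↔ R y b := by
      rw [hR3 y b hy0 hy3 hb0 hb3]
      constructor
      · rintro (h | ⟨_, h2⟩ | ⟨_, h2⟩)
        · exact h
        · exact absurd h2 hRbj
        · exact absurd h2 hRba
      · exact Or.inl
    have hR3xi : pvRoot p3 x = pvRoot p3 i ↔ R x i := by
      rw [hR3 x i hx0 hx3 hi0 hi3]
      constructor
      · rintro (h | ⟨_, h2⟩ | ⟨_, h2⟩)
        · exact h
        · exact absurd h2 hRij
        · exact absurd h2 hRia
      · exact Or.inl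
    have hR3yi : pvRoot p3 y = pvRoot p3 i ↔ R y i := by
      rw [hR3 y i hy0 hy3 hi0 hi3]
      constructor
      · rintro (h | ⟨_, h2⟩ | ⟨_, h2⟩)
        · exact h
        · exact absurd h2 hRij
        · exact absurd h2 hRia
      · exact Or.inl
    rw [pvRootEq_join (pvJoinA p2 wt a j).2 hJ1inv hb0 hb3 hi0 hi3 hx0 hx3 hy0 hy3]
    rw [hR3 x y hx0 hx3 hy0 hy3, hR3xb, hR3yi, hR3xi, hR3yb, hsplice]
    have t1 := hPartOdd a hgi x hx0 hx1
    have t2 := hJY y hy0 hy1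
    have t3 := hXJ x hx0 hx1
    have t4 : pvConn E i y true ↔ R y a := by
      rw [hSymT i y]; exact hPartOdd a hgi y hy0 hy1
    have t5 := hPartOddJ b hgj x hx0 hx1
    have t6 := hIY y hy0 hy1
    have t7 := hXI x hx0 hx1
    have t8 : pvConn E j y true ↔ R y b := by
      rw [hSymT j y]; exact hPartOddJ b hgj y hy0 hy1
    have t9 := hRootIff x y hx0 hx1 hy0 hy1
    rw [t1, t2, t3, t4, t5, t6, t7, t8, ← t9]
    constructor
    · rintro ((h | h | h) | h | h)
      · exact Or.inl h
      · exact Or.inr (Or.inl (Or.inr h))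
      · exact Or.inr (Or.inr (Or.inl h))
      · exact Or.inr (Or.inr (Or.inr h))
      · exact Or.inr (Or.inl (Or.inl h))
    · rintro (h | (h | h) | (h | h))
      · exact Or.inl (Or.inl h)
      · exact Or.inr (Or.inr h)
      · exact Or.inl (Or.inr (Or.inl h))
      · exact Or.inl (Or.inr (Or.inr h))
      · exact Or.inr (Or.inl h)


lemma pvLoopA_cons (d i j : Int) (rest : List (Int × Int × Int)) (p wt : List Int)
    (opp : PySem.Dict Int Int) :
    pvLoopA ((d, i, j) :: rest) p wt opp =
      (let f1 := pvFindA p i p.length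
       let f2 := pvFindA f1.1 j f1.1.length
       if f1.2 = f2.2 then some d
       else
         let s1 := match opp.get? i with
           | some oi => pvJoinA f2.1 wt oi j
           | none => (f2.1, wt)
         let s2 := match opp.get? j with
           | some oj => pvJoinA s1.1 s1.2 oj i
           | none => s1
         pvLoopA rest s2.1 s2.2 ((opp.insert i j).insert j i)) := rfl

-- A's sweep stops at the first edge whose prefix stops being bipartite
lemma pvLoopA_char : ∀ (rest : List (Int × Int × Int)) (n : Int)
    (E : List (Int × Int × Int)) (p wt : List Int) (opp : PySem.Dict Int Int),
    pvInvA n E p opp → pvRangeOK n rest →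
    (pvLoopA rest p wt opp = none ∧ pvBip (E ++ rest)) ∨
    (∃ r1 d' i' j' r2, rest = r1 ++ (d', i', j') :: r2 ∧
      pvLoopA rest p wt opp = some d' ∧
      pvBip (E ++ r1) ∧ ¬ pvBip (E ++ (r1 ++ [(d', i', j')]))) := by
  intro rest
  induction rest with
  | nil =>
    intro n E p wt opp hInv _
    exact Or.inl ⟨rfl, by simpa using hInv.2.2.2.2.1⟩
  | cons e rest ih =>
    obtain ⟨d, i, j⟩ := e
    intro n E p wt opp hInv hRange
    obtain ⟨hi0, hi1, hj0, hj1⟩ := hRange (d, i, j) List.mem_cons_self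
    have hRrest : pvRangeOK n rest := fun e he => hRange e (List.mem_cons_of_mem _ he)
    obtain ⟨hpInv, hplen, hOpp, hTouch, hB, hRootIff⟩ := hInv
    have hInv' : pvInvA n E p opp := ⟨hpInv, hplen, hOpp, hTouch, hB, hRootIff⟩
    have hi1' : i < (p.length : Int) := by rw [hplen]; exact hi1
    have hj1' : j < (p.length : Int) := by rw [hplen]; exact hj1
    obtain ⟨f1r, f1len, f1inv, f1root⟩ :=
      pvFindA_spec p.length p i hpInv hi0 hi1' (pvRoot_fix hpInv hi0 hi1')
    have hj1'' : j < ((pvFindA p i p.length).1.length : Int) := by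
      rw [f1len]; exact hj1'
    obtain ⟨f2r, f2len, f2inv, f2root⟩ :=
      pvFindA_spec (pvFindA p i p.length).1.length (pvFindA p i p.length).1 j f1inv hj0
        hj1'' (pvRoot_fix f1inv hj0 hj1'')
    have hval1 : (pvFindA p i p.length).2 = pvRoot p i := f1r
    have hval2 : (pvFindA (pvFindA p i p.length).1 j (pvFindA p i p.length).1.length).2 =
        pvRoot p j := by
      rw [f2r, f1root j hj0 hj1']
    by_cases hc : (pvFindA p i p.length).2 =
        (pvFindA (pvFindA p i p.length).1 j (pvFindA p i p.length).1.length).2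
    · -- conflict: roots equal, i.e. an even walk i ~ j already exists
      have hconn : pvConn E i j false := by
        rw [hval1, hval2] at hc
        exact (hRootIff i j hi0 hi1 hj0 hj1).mp hc
      refine Or.inr ⟨[], d, i, j, rest, by simp, ?_, by simpa using hB, ?_⟩
      · rw [pvLoopA_cons]
        simp only [if_pos hc]
      · simpa using pvNotBip_append hconn
    · -- no conflict: step the invariant and recurse
      have hnoc : ¬ pvConn E i j false := by
        intro hconn
        apply hc
        rw [hval1, hval2]
        exact (hRootIff i j hi0 hi1 hj0 hj1).mpr hconn
      have hlen2 : ((pvFindA (pvFindA p i p.length).1 j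
          (pvFindA p i p.length).1.length).1.length : Int) = n := by
        rw [f2len, f1len]; exact hplen
      have hroots2 : ∀ z, 0 ≤ z → z < n →
          pvRoot (pvFindA (pvFindA p i p.length).1 j
            (pvFindA p i p.length).1.length).1 z = pvRoot p z := by
        intro z hz0 hz1
        have hz1' : z < (p.length : Int) := by rw [hplen]; exact hz1
        have hz1'' : z < ((pvFindA p i p.length).1.length : Int) := by
          rw [f1len]; exact hz1'
        rw [f2root z hz0 hz1'', f1root z hz0 hz1']
      have hstep := pvStepA (wt := wt) (d := d) hInv' f2inv hlen2 hroots2 hi0 hi1 hj0 hj1 hnoc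
      have hrec := ih n (E ++ [(d, i, j)]) _ (match opp.get? j with
          | some oj => (pvJoinA (match opp.get? i with
                | some oi => pvJoinA (pvFindA (pvFindA p i p.length).1 j
                    (pvFindA p i p.length).1.length).1 wt oi j
                | none => ((pvFindA (pvFindA p i p.length).1 j
                    (pvFindA p i p.length).1.length).1, wt)).1
              (match opp.get? i with
                | some oi => pvJoinA (pvFindA (pvFindA p i p.length).1 j
                    (pvFindA p i p.length).1.length).1 wt oi j
                | none => ((pvFindA (pvFindA p i p.length).1 j
                    (pvFindA p i p.length).1.length).1, wt)).2 oj i).2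
          | none => (match opp.get? i with
                | some oi => pvJoinA (pvFindA (pvFindA p i p.length).1 j
                    (pvFindA p i p.length).1.length).1 wt oi j
                | none => ((pvFindA (pvFindA p i p.length).1 j
                    (pvFindA p i p.length).1.length).1, wt)).2)
          ((opp.insert i j).insert j i) hstep
        (fun e he => hRrest e he)
      have hloopeq : pvLoopA ((d, i, j) :: rest) p wt opp =
          pvLoopA rest (match opp.get? j with
            | some oj => (pvJoinA (match opp.get? i with
                  | some oi => pvJoinA (pvFindA (pvFindA p i p.length).1 j
                      (pvFindA p i p.length).1.length).1 wt oi j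
                  | none => ((pvFindA (pvFindA p i p.length).1 j
                      (pvFindA p i p.length).1.length).1, wt)).1
                (match opp.get? i with
                  | some oi => pvJoinA (pvFindA (pvFindA p i p.length).1 j
                      (pvFindA p i p.length).1.length).1 wt oi j
                  | none => ((pvFindA (pvFindA p i p.length).1 j
                      (pvFindA p i p.length).1.length).1, wt)).2 oj i).1
            | none => (match opp.get? i with
                  | some oi => pvJoinA (pvFindA (pvFindA p i p.length).1 j
                      (pvFindA p i p.length).1.length).1 wt oi j
                  | none => ((pvFindA (pvFindA p i p.length).1 j
                      (pvFindA p i p.length).1.length).1, wt)).1)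
            (match opp.get? j with
            | some oj => (pvJoinA (match opp.get? i with
                  | some oi => pvJoinA (pvFindA (pvFindA p i p.length).1 j
                      (pvFindA p i p.length).1.length).1 wt oi j
                  | none => ((pvFindA (pvFindA p i p.length).1 j
                      (pvFindA p i p.length).1.length).1, wt)).1
                (match opp.get? i with
                  | some oi => pvJoinA (pvFindA (pvFindA p i p.length).1 j
                      (pvFindA p i p.length).1.length).1 wt oi j
                  | none => ((pvFindA (pvFindA p i p.length).1 j
                      (pvFindA p i p.length).1.length).1, wt)).2 oj i).2
            | none => (match opp.get? i with
                  | some oi => pvJoinA (pvFindA (pvFindA p i p.length).1 j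
                      (pvFindA p i p.length).1.length).1 wt oi j
                  | none => ((pvFindA (pvFindA p i p.length).1 j
                      (pvFindA p i p.length).1.length).1, wt)).2)
            ((opp.insert i j).insert j i) := by
        rw [pvLoopA_cons]
        simp only [if_neg hc]
        rcases opp.get? i with _ | a <;> rcases opp.get? j with _ | b <;> rfl
      rcases hrec with ⟨hnone, hbip⟩ | ⟨r1, d', i', j', r2, heq, hsome, hb1, hb2⟩
      · refine Or.inl ⟨?_, ?_⟩
        · rw [hloopeq]; exact hnone
        · have : E ++ [(d, i, j)] ++ rest = E ++ ((d, i, j) :: rest) := by simp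
          rwa [this] at hbip
      · refine Or.inr ⟨(d, i, j) :: r1, d', i', j', r2, by rw [heq]; rfl, ?_, ?_, ?_⟩
        · rw [hloopeq]; exact hsome
        · have : E ++ [(d, i, j)] ++ r1 = E ++ ((d, i, j) :: r1) := by simp
          rwa [this] at hb1
        · have : E ++ [(d, i, j)] ++ (r1 ++ [(d', i', j')]) =
              E ++ ((d, i, j) :: r1 ++ [(d', i', j')]) := by simp
          rwa [this] at hb2


-- ---- B's adjacency dictionary ----

def pvPairs (E : List (Int × Int × Int)) : List (Int × Int) :=
  E.flatMap (fun e => [(e.2.1, e.2.2), (e.2.2, e.2.1)])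

lemma pvMem_pairs {E : List (Int × Int × Int)} {u v : Int} :
    (u, v) ∈ pvPairs E ↔ pvIsEdge E u v := by
  simp only [pvPairs, List.mem_flatMap, List.mem_cons]
  constructor
  · rintro ⟨⟨d', a, b⟩, hm, h | h | h⟩
    · obtain ⟨h2a, h2b⟩ := Prod.ext_iff.mp h
      subst h2a; subst h2b
      exact ⟨d', Or.inl hm⟩
    · obtain ⟨h2a, h2b⟩ := Prod.ext_iff.mp h
      subst h2a; subst h2b
      exact ⟨d', Or.inr hm⟩
    · cases h
  · rintro ⟨d', h | h⟩
    · exact ⟨(d', u, v), h, Or.inl rfl⟩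
    · exact ⟨(d', v, u), h, Or.inr (Or.inl rfl)⟩

lemma pvAdjacency_foldl : ∀ (E : List (Int × Int × Int)) (dd : PySem.Dict Int (List Int)),
    E.foldl (fun d e => (d.modify e.2.1 [] (· ++ [e.2.2])).modify e.2.2 [] (· ++ [e.2.1])) dd =
      (pvPairs E).foldl (fun d pr => d.modify pr.1 [] (· ++ [pr.2])) dd := by
  intro E
  induction E with
  | nil => intro dd; rfl
  | cons e t ih =>
    intro dd
    simp only [List.foldl_cons, pvPairs, List.flatMap_cons, List.foldl_append]
    rw [ih]
    rfl

lemma pvAdj_getD (E : List (Int × Int × Int)) (u : Int) :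
    (pvAdjacency E).getD u [] = ((pvPairs E).filter (·.1 == u)).map (·.2) := by
  rw [pvAdjacency, pvAdjacency_foldl, PySem.Dict.getD_foldl_modify_append]
  rw [PySem.Dict.getD_empty]
  rfl

lemma pvAdj_mem {E : List (Int × Int × Int)} {u v : Int} :
    v ∈ (pvAdjacency E).getD u [] ↔ pvIsEdge E u v := by
  rw [pvAdj_getD]
  simp only [List.mem_map, List.mem_filter, beq_iff_eq]
  constructor
  · rintro ⟨⟨a, b⟩, ⟨hm, rfl⟩, rfl⟩
    exact pvMem_pairs.mp hm
  · intro h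
    exact ⟨(u, v), ⟨pvMem_pairs.mpr h, rfl⟩, rfl⟩

lemma pvContains_foldl_modify : ∀ (l : List (Int × Int)) (dd : PySem.Dict Int (List Int))
    (u : Int), ((l.foldl (fun d pr => d.modify pr.1 [] (· ++ [pr.2])) dd).contains u) =
      (dd.contains u || l.any (fun pr => pr.1 == u)) := by
  intro l
  induction l with
  | nil => intro dd u; simp
  | cons pr t ih =>
    intro dd u
    simp only [List.foldl_cons, List.any_cons]
    rw [ih, PySem.Dict.contains_modify]
    by_cases h : u = pr.1
    · subst h; simp
    · have h1 : (u == pr.1) = false := by simpa using h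
      have h2 : (pr.1 == u) = false := by simpa using Ne.symm h
      rw [h1, h2]
      simp

lemma pvAdj_keys_mem {E : List (Int × Int × Int)} {u : Int} :
    u ∈ (pvAdjacency E).keys ↔ ∃ v, pvIsEdge E u v := by
  rw [← PySem.Dict.contains_iff_mem_keys, pvAdjacency, pvAdjacency_foldl,
    pvContains_foldl_modify]
  simp only [PySem.Dict.contains_empty, Bool.false_or, List.any_eq_true, beq_iff_eq]
  constructor
  · rintro ⟨⟨a, b⟩, hm, rfl⟩
    exact ⟨b, pvMem_pairs.mp hm⟩
  · rintro ⟨v, h⟩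
    exact ⟨(u, v), pvMem_pairs.mpr h, rfl⟩

lemma pvAdj_keys_nodup (E : List (Int × Int × Int)) : (pvAdjacency E).keys.Nodup := by
  rw [pvAdjacency, pvAdjacency_foldl]
  have : ∀ (l : List (Int × Int)) (dd : PySem.Dict Int (List Int)), dd.keys.Nodup →
      ((l.foldl (fun d pr => d.modify pr.1 [] (· ++ [pr.2])) dd).keys).Nodup := by
    intro l
    induction l with
    | nil => intro dd h; exact h
    | cons pr t ih =>
      intro dd h
      simp only [List.foldl_cons]
      apply ih
      rw [PySem.Dict.keys_modify]
      exact PySem.Dict.nodup_keys_insert dd _ _ h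
  apply this
  simp [PySem.Dict.keys_empty]


-- ---- B's greedy 2-coloring ----

def pvUnc (K : List Int) (c : PySem.Dict Int Int) : Nat :=
  K.countP (fun x => !(c.get? x).isSome)

lemma pvUnc_le (K : List Int) (c : PySem.Dict Int Int) : pvUnc K c ≤ K.length :=
  List.countP_le_length

lemma pvUnc_insert {K : List Int} {c : PySem.Dict Int Int} {v w : Int}
    (hK : K.Nodup) (hv : v ∈ K) (hnone : c.get? v = none) :
    pvUnc K (c.insert v w) + 1 = pvUnc K c := by
  induction K with
  | nil => cases hv
  | cons x t ih =>
    rw [List.nodup_cons] at hK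
    rw [pvUnc, pvUnc, List.countP_cons, List.countP_cons]
    by_cases hxv : x = v
    · subst hxv
      have hins : ((c.insert x w).get? x) = some w := by
        rw [PySem.Dict.get?_insert, if_pos rfl]
      have hfeq : t.countP (fun y => !((c.insert x w).get? y).isSome) =
          t.countP (fun y => !(c.get? y).isSome) := by
        apply List.countP_congr
        intro y hy
        rw [PySem.Dict.get?_insert, if_neg (by intro h; exact hK.1 (h ▸ hy))]
      rw [hins, hnone, hfeq]
      simp
    · have hx : ((c.insert v w).get? x) = c.get? x := by
        rw [PySem.Dict.get?_insert, if_neg hxv]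
      have hvt : v ∈ t := (List.mem_cons.mp hv).resolve_left (fun h => hxv h.symm)
      have ihe := ih hK.2 hvt
      rw [pvUnc, pvUnc] at ihe
      rw [hx]
      omega

lemma pvPar_flip {cu : Int} (hcu : cu = 0 ∨ cu = 1) : ((1 - cu) == 1) = (!(cu == 1)) := by
  rcases hcu with rfl | rfl <;> rfl

lemma pvVisit_spec (E : List (Int × Int × Int)) (K : List Int) (s u : Int)
    (old : PySem.Dict Int Int) (cu : Int)
    (hOldP : ∀ a b, pvIsEdge E a b → (old.get? a).isSome = true → (old.get? b).isSome = true)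
    (hK : K.Nodup) :
    ∀ (nbrs : List Int) (c : PySem.Dict Int Int) (st : List Int),
    (∀ v ∈ nbrs, pvIsEdge E u v) →
    (∀ v ∈ nbrs, v ∈ K) →
    c.get? u = some cu →
    (old.get? u).isSome = false →
    pvConn E s u (cu == 1) →
    (∀ x w, c.get? x = some w → w = 0 ∨ w = 1) →
    (∀ x, (old.get? x).isSome = true → c.get? x = old.get? x) →
    (∀ x, (c.get? x).isSome = true → (old.get? x).isSome = true ∨
      pvConn E s x (c.getD x 0 == 1)) →
    (∀ x ∈ st, (c.get? x).isSome = true ∧ (old.get? x).isSome = false) →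
    st.Nodup → u ∉ st →
    (pvVisit cu nbrs c st = none → ¬ pvBip E) ∧
    (∀ c' st', pvVisit cu nbrs c st = some (c', st') →
      (∀ x, (c.get? x).isSome = true → c'.get? x = c.get? x) ∧
      (∀ x w, c'.get? x = some w → w = 0 ∨ w = 1) ∧
      (∀ x, (old.get? x).isSome = true → c'.get? x = old.get? x) ∧
      (∀ x, (c'.get? x).isSome = true → (old.get? x).isSome = true ∨
        pvConn E s x (c'.getD x 0 == 1)) ∧
      (∀ x ∈ st', (c'.get? x).isSome = true ∧ (old.get? x).isSome = false) ∧
      st'.Nodup ∧ u ∉ st' ∧ (∀ x ∈ st, x ∈ st') ∧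
      (st'.length + pvUnc K c' = st.length + pvUnc K c) ∧
      (∀ v ∈ nbrs, (c'.get? v).isSome = true ∧ ¬ c'.getD v 0 = cu) ∧
      (∀ x, (c'.get? x).isSome = true → (c.get? x).isSome = true ∨ x ∈ st')) := by
  intro nbrs
  induction nbrs with
  | nil =>
    intro c st _ _ hcu hou hconnu hvals hold hconn hst hnd hun
    constructor
    · intro h; cases h
    · intro c' st' h
      injection h with h
      obtain ⟨h1, h2⟩ := Prod.ext_iff.mp h
      subst h1; subst h2
      refine ⟨fun x _ => rfl, hvals, hold, hconn, hst, hnd, hun, fun x hx => hx, rfl,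
        fun v hv => absurd hv (List.not_mem_nil), fun x hx => Or.inl hx⟩
  | cons v rest ih =>
    intro c st hn hkv hcu hou hconnu hvals hold hconn hst hnd hun
    have hedgeuv : pvIsEdge E u v := hn v List.mem_cons_self
    have hcuval : cu = 0 ∨ cu = 1 := hvals u cu hcu
    rcases hgv : c.get? v with _ | cv
    · -- v gets colored 1 - cu and pushed
      have hneuv : u ≠ v := fun h => by rw [h, hgv] at hcu; cases hcu
      have hvnotold : (old.get? v).isSome = false := by
        cases hov : (old.get? v).isSome
        · rfl
        · exfalso
          have h2 := hold v hov
          rw [hgv] at h2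
          rw [← h2] at hov
          cases hov
      have hvK : v ∈ K := hkv v List.mem_cons_self
      have hext : ∀ x, (c.get? x).isSome = true →
          (c.insert v (1 - cu)).get? x = c.get? x := by
        intro x hx
        rw [PySem.Dict.get?_insert, if_neg (fun h => by rw [h, hgv] at hx; cases hx)]
      have hrec := ih (c.insert v (1 - cu)) (v :: st)
        (fun w hw => hn w (List.mem_cons_of_mem _ hw))
        (fun w hw => hkv w (List.mem_cons_of_mem _ hw))
        (by rw [hext u (by rw [hcu]; rfl)]; exact hcu)
        hou hconnu
        (by
          intro x w hx
          rw [PySem.Dict.get?_insert] at hx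
          by_cases hxv : x = v
          · rw [if_pos hxv] at hx
            injection hx with hx
            omega
          · rw [if_neg hxv] at hx
            exact hvals x w hx)
        (by
          intro x hx
          have hxs := hold x hx
          rw [hext x (by rw [hxs]; exact hx)]
          exact hxs)
        (by
          intro x hx
          by_cases hxv : x = v
          · subst hxv
            refine Or.inr ?_
            have hpar : (c.insert x (1 - cu)).getD x 0 = 1 - cu := by
              rw [PySem.Dict.getD_eq_get?_getD, PySem.Dict.get?_insert, if_pos rfl]
              rfl
            rw [hpar, pvPar_flip hcuval]
            exact pvConn.step hconnu hedgeuv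
          · have hx' : (c.get? x).isSome = true := by
              rw [PySem.Dict.get?_insert, if_neg hxv] at hx
              exact hx
            rcases hconn x hx' with h | h
            · exact Or.inl h
            · refine Or.inr ?_
              have : (c.insert v (1 - cu)).getD x 0 = c.getD x 0 := by
                rw [PySem.Dict.getD_eq_get?_getD, PySem.Dict.get?_insert, if_neg hxv,
                  PySem.Dict.getD_eq_get?_getD]
              rwa [this])
        (by
          intro x hx
          rcases List.mem_cons.mp hx with hxv | hx'
          · subst hxv
            constructor
            · rw [PySem.Dict.get?_insert, if_pos rfl]; rfl
            · exact hvnotold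
          · obtain ⟨h1, h2⟩ := hst x hx'
            exact ⟨by rw [hext x h1]; exact h1, h2⟩)
        (by
          rw [List.nodup_cons]
          refine ⟨fun hv' => ?_, hnd⟩
          have := (hst v hv').1
          rw [hgv] at this
          cases this)
        (by
          intro h
          rcases List.mem_cons.mp h with h' | h'
          · exact hneuv h'
          · exact hun h')
      constructor
      · intro h
        rw [pvVisit, hgv] at h
        exact hrec.1 h
      · intro c' st' h
        rw [pvVisit, hgv] at h
        obtain ⟨e1, e2, e3, e4, e5, e6, e7, e8, e9, e10, e11⟩ := hrec.2 c' st' h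
        have hvcol : (c.insert v (1 - cu)).get? v = some (1 - cu) := by
          rw [PySem.Dict.get?_insert, if_pos rfl]
        have hvstk : v ∈ st' := e8 v List.mem_cons_self
        refine ⟨?_, e2, e3, e4, e5, e6, e7, ?_, ?_, ?_, ?_⟩
        · intro x hx
          rw [e1 x (by rw [hext x hx]; exact hx), hext x hx]
        · intro x hx
          exact e8 x (List.mem_cons_of_mem _ hx)
        · have := pvUnc_insert (w := 1 - cu) hK hvK hgv
          simp only [List.length_cons] at e9
          omega
        · intro w hw
          rcases List.mem_cons.mp hw with hwv | hw'
          · subst hwv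
            have hc'v : c'.get? w = some (1 - cu) := by
              rw [e1 w (by rw [hvcol]; rfl)]
              exact hvcol
            constructor
            · rw [hc'v]; rfl
            · rw [PySem.Dict.getD_eq_get?_getD, hc'v]
              rcases hcuval with rfl | rfl <;> simp
          · exact e10 w hw'
        · intro x hx
          rcases e11 x hx with h' | h'
          · rw [PySem.Dict.get?_insert] at h'
            by_cases hxv : x = v
            · subst hxv
              exact Or.inr hvstk
            · rw [if_neg hxv] at h'
              exact Or.inl h'
          · exact Or.inr h'
    · -- v is already colored: conflict or skip
      by_cases hcveq : cv = cu
      · -- conflict: an odd closed walk exists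
        constructor
        · intro _
          have hvcol : (c.get? v).isSome = true := by rw [hgv]; rfl
          have hvnotold : (old.get? v).isSome = false := by
            cases hov : (old.get? v).isSome
            · rfl
            · exfalso
              have h2 := hOldP v u (pvIsEdge_symm hedgeuv) hov
              rw [hou] at h2
              cases h2
          have hconnv : pvConn E s v (c.getD v 0 == 1) := by
            rcases hconn v hvcol with h | h
            · rw [h] at hvnotold; cases hvnotold
            · exact h
          have hpar : c.getD v 0 = cu := by
            rw [PySem.Dict.getD_eq_get?_getD, hgv, hcveq]
            rfl
          rw [hpar] at hconnv
          intro hB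
          have h1 : pvConn E s v (!(cu == 1)) := pvConn.step hconnu hedgeuv
          have h2 := pvConn_trans (pvConn_symm hconnv) h1
          have hb : ((cu == 1) ^^ !(cu == 1)) = true := by cases (cu == 1) <;> rfl
          rw [hb] at h2
          exact hB v h2
        · intro c' st' h
          rw [pvVisit, hgv] at h
          have h' : (if cv = cu then none
              else pvVisit cu rest c st) = some (c', st') := h
          rw [if_pos hcveq] at h'
          cases h'
      · -- consistent: continue
        have hrec := ih c st (fun w hw => hn w (List.mem_cons_of_mem _ hw))
          (fun w hw => hkv w (List.mem_cons_of_mem _ hw)) hcu hou hconnu hvals hold hconn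
          hst hnd hun
        constructor
        · intro h
          rw [pvVisit, hgv] at h
          have h' : (if cv = cu then none
              else pvVisit cu rest c st) = none := h
          rw [if_neg hcveq] at h'
          exact hrec.1 h'
        · intro c' st' h
          rw [pvVisit, hgv] at h
          have h' : (if cv = cu then none
              else pvVisit cu rest c st) = some (c', st') := h
          rw [if_neg hcveq] at h'
          obtain ⟨e1, e2, e3, e4, e5, e6, e7, e8, e9, e10, e11⟩ := hrec.2 c' st' h'
          refine ⟨e1, e2, e3, e4, e5, e6, e7, e8, e9, ?_, e11⟩
          intro w hw
          rcases List.mem_cons.mp hw with hwv | hw'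
          · subst hwv
            have hc'v : c'.get? w = some cv := by
              rw [e1 w (by rw [hgv]; rfl)]
              exact hgv
            constructor
            · rw [hc'v]; rfl
            · rw [PySem.Dict.getD_eq_get?_getD, hc'v]
              exact hcveq
          · exact e10 w hw'


lemma pvColorLoop_spec (E : List (Int × Int × Int)) (adj : PySem.Dict Int (List Int))
    (s : Int) (old : PySem.Dict Int Int)
    (hadj : ∀ u v, v ∈ adj.getD u [] ↔ pvIsEdge E u v)
    (hkeysm : ∀ u, (∃ v, pvIsEdge E u v) → u ∈ adj.keys)
    (hKnd : adj.keys.Nodup)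
    (hOldP : ∀ a b, pvIsEdge E a b → (old.get? a).isSome = true → (old.get? b).isSome = true) :
    ∀ (fuel : Nat) (c : PySem.Dict Int Int) (stack : List Int),
    (∀ x w, c.get? x = some w → w = 0 ∨ w = 1) →
    (∀ x, (old.get? x).isSome = true → c.get? x = old.get? x) →
    (∀ x, (c.get? x).isSome = true → (old.get? x).isSome = true ∨
      pvConn E s x (c.getD x 0 == 1)) →
    (∀ x ∈ stack, (c.get? x).isSome = true ∧ (old.get? x).isSome = false) →
    stack.Nodup →
    (∀ a b, pvIsEdge E a b → (c.get? a).isSome = true → a ∉ stack →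
      (c.get? b).isSome = true ∧ ¬ c.getD b 0 = c.getD a 0) →
    stack.length + pvUnc adj.keys c ≤ fuel →
    (pvColorLoop adj fuel c stack = none → ¬ pvBip E) ∧
    (∀ c', pvColorLoop adj fuel c stack = some c' →
      (∀ x, (c.get? x).isSome = true → c'.get? x = c.get? x) ∧
      (∀ x w, c'.get? x = some w → w = 0 ∨ w = 1) ∧
      (∀ a b, pvIsEdge E a b → (c'.get? a).isSome = true →
        (c'.get? b).isSome = true ∧ ¬ c'.getD b 0 = c'.getD a 0)) := by
  intro fuel
  induction fuel with
  | zero =>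
    intro c stack hvals hold hconn hst hnd hprop hmu
    cases stack with
    | nil =>
      constructor
      · intro h; cases h
      · intro c' h
        injection h with h
        subst h
        exact ⟨fun x _ => rfl, hvals, fun a b hab ha => hprop a b hab ha List.not_mem_nil⟩
    | cons u st => simp at hmu
  | succ fuel ih =>
    intro c stack hvals hold hconn hst hnd hprop hmu
    cases stack with
    | nil =>
      constructor
      · intro h; cases h
      · intro c' h
        injection h with h
        subst h
        exact ⟨fun x _ => rfl, hvals, fun a b hab ha => hprop a b hab ha List.not_mem_nil⟩
    | cons u st =>
      obtain ⟨hucol, hunold⟩ := hst u List.mem_cons_self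
      obtain ⟨cu, hcu⟩ := Option.isSome_iff_exists.mp hucol
      have hgd : c.getD u 0 = cu := by rw [PySem.Dict.getD_eq_get?_getD, hcu]; rfl
      have hconnu : pvConn E s u (cu == 1) := by
        rcases hconn u hucol with h | h
        · rw [h] at hunold; cases hunold
        · rwa [hgd] at h
      rw [List.nodup_cons] at hnd
      have hvisit := pvVisit_spec E adj.keys s u old cu hOldP hKnd (adj.getD u []) c st
        (fun v hv => (hadj u v).mp hv)
        (fun v hv => hkeysm v ⟨u, pvIsEdge_symm ((hadj u v).mp hv)⟩)
        hcu hunold hconnu hvals hold hconn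
        (fun x hx => hst x (List.mem_cons_of_mem _ hx)) hnd.2 hnd.1
      rw [pvColorLoop, hgd]
      rcases hv : pvVisit cu (adj.getD u []) c st with _ | ⟨c1, st1⟩
      · constructor
        · intro _; exact hvisit.1 hv
        · intro c' h
          simp at h
      · obtain ⟨e1, e2, e3, e4, e5, e6, e7, e8, e9, e10, e11⟩ := hvisit.2 c1 st1 hv
        have hprop1 : ∀ a b, pvIsEdge E a b → (c1.get? a).isSome = true → a ∉ st1 →
            (c1.get? b).isSome = true ∧ ¬ c1.getD b 0 = c1.getD a 0 := by
          intro a b hab hca hnotin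
          by_cases hac : (c.get? a).isSome = true
          · by_cases hau : a = u
            · subst hau
              have hbnbr : b ∈ adj.getD a [] := (hadj a b).mpr hab
              obtain ⟨hb1, hb2⟩ := e10 b hbnbr
              refine ⟨hb1, ?_⟩
              have hda : c1.getD a 0 = cu := by
                rw [PySem.Dict.getD_eq_get?_getD, e1 a hac, hcu]
                rfl
              rw [hda]
              exact hb2
            · have hanotst : a ∉ st := fun h => hnotin (e8 a h)
              have hanot : a ∉ u :: st := by
                intro h
                rcases List.mem_cons.mp h with h' | h'
                · exact hau h'
                · exact hanotst h'
              obtain ⟨hb1, hb2⟩ := hprop a b hab hac hanot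
              have hbe : c1.get? b = c.get? b := e1 b hb1
              have hae : c1.get? a = c.get? a := e1 a hac
              refine ⟨by rw [hbe]; exact hb1, ?_⟩
              have hgb : c1.getD b 0 = c.getD b 0 := by
                rw [PySem.Dict.getD_eq_get?_getD, hbe, ← PySem.Dict.getD_eq_get?_getD]
              have hga : c1.getD a 0 = c.getD a 0 := by
                rw [PySem.Dict.getD_eq_get?_getD, hae, ← PySem.Dict.getD_eq_get?_getD]
              rw [hgb, hga]
              exact hb2
          · rcases e11 a hca with h' | h'
            · exact absurd h' hac
            · exact absurd h' hnotin
        have hmu1 : st1.length + pvUnc adj.keys c1 ≤ fuel := by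
          simp only [List.length_cons] at hmu
          omega
        have hrec := ih c1 st1 e2 e3 e4 e5 e6 hprop1 hmu1
        constructor
        · exact hrec.1
        · intro c' h
          obtain ⟨f1, f2, f3⟩ := hrec.2 c' h
          refine ⟨?_, f2, f3⟩
          intro x hx
          rw [f1 x (by rw [e1 x hx]; exact hx), e1 x hx]

lemma pvSeedLoop_spec (E : List (Int × Int × Int)) (adj : PySem.Dict Int (List Int))
    (hadj : ∀ u v, v ∈ adj.getD u [] ↔ pvIsEdge E u v)
    (hkeysm : ∀ u, (∃ v, pvIsEdge E u v) → u ∈ adj.keys)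
    (hKnd : adj.keys.Nodup) :
    ∀ (ks : List Int) (c : PySem.Dict Int Int),
    (∀ x w, c.get? x = some w → w = 0 ∨ w = 1) →
    (∀ a b, pvIsEdge E a b → (c.get? a).isSome = true →
      (c.get? b).isSome = true ∧ ¬ c.getD b 0 = c.getD a 0) →
    (pvSeedLoop adj ks c = none → ¬ pvBip E) ∧
    (∀ c', pvSeedLoop adj ks c = some c' →
      (∀ x, (c.get? x).isSome = true → (c'.get? x).isSome = true) ∧
      (∀ x w, c'.get? x = some w → w = 0 ∨ w = 1) ∧
      (∀ a b, pvIsEdge E a b → (c'.get? a).isSome = true →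
        (c'.get? b).isSome = true ∧ ¬ c'.getD b 0 = c'.getD a 0) ∧
      (∀ x ∈ ks, (c'.get? x).isSome = true)) := by
  intro ks
  induction ks with
  | nil =>
    intro c hvals hprop
    constructor
    · intro h; cases h
    · intro c' h
      injection h with h
      subst h
      exact ⟨fun x hx => hx, hvals, hprop, fun x hx => absurd hx List.not_mem_nil⟩
  | cons sk rest ih =>
    intro c hvals hprop
    rw [pvSeedLoop]
    by_cases hcs : c.contains sk = true
    · rw [if_pos hcs]
      have hcol : (c.get? sk).isSome = true := by
        rw [← PySem.Dict.contains_eq_isSome_get?]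
        exact hcs
      have hrec := ih c hvals hprop
      constructor
      · exact hrec.1
      · intro c' h
        obtain ⟨f1, f0, f2, f3⟩ := hrec.2 c' h
        refine ⟨f1, f0, f2, ?_⟩
        intro x hx
        rcases List.mem_cons.mp hx with hxv | hx'
        · subst hxv
          exact f1 x hcol
        · exact f3 x hx'
    · rw [if_neg hcs]
      have hsnone : c.get? sk = none := by
        rw [PySem.Dict.contains_eq_isSome_get?] at hcs
        cases h : c.get? sk
        · rfl
        · rw [h] at hcs; exact absurd rfl hcs
      have hins : (c.insert sk 0).get? sk = some 0 := by
        rw [PySem.Dict.get?_insert, if_pos rfl]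
      have hinsne : ∀ x, x ≠ sk → (c.insert sk 0).get? x = c.get? x := by
        intro x hx
        rw [PySem.Dict.get?_insert, if_neg hx]
      have hsz : adj.keys.length = adj.size := by
        simp [PySem.Dict.keys, PySem.Dict.size]
      have hloop := pvColorLoop_spec E adj sk c hadj hkeysm hKnd
        (fun a b hab ha => (hprop a b hab ha).1)
        (adj.size + 1) (c.insert sk 0) [sk]
        (by
          intro x w hx
          by_cases hxs : x = sk
          · subst hxs
            rw [hins] at hx
            injection hx with hx
            exact Or.inl hx.symm
          · rw [hinsne x hxs] at hx
            exact hvals x w hx)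
        (by
          intro x hx
          by_cases hxs : x = sk
          · subst hxs
            rw [hsnone] at hx
            cases hx
          · exact hinsne x hxs)
        (by
          intro x hx
          by_cases hxs : x = sk
          · subst hxs
            refine Or.inr ?_
            have : (c.insert x 0).getD x 0 = 0 := by
              rw [PySem.Dict.getD_eq_get?_getD, hins]
              rfl
            rw [this]
            exact pvConn.refl x
          · rw [hinsne x hxs] at hx
            exact Or.inl hx)
        (by
          intro x hx
          rcases List.mem_cons.mp hx with hxv | hx'
          · subst hxv
            exact ⟨by rw [hins]; rfl, by rw [hsnone]; rfl⟩
          · exact absurd hx' List.not_mem_nil)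
        (List.nodup_singleton _)
        (by
          intro a b hab ha hnotin
          have has : a ≠ sk := by
            intro h
            exact hnotin (by rw [h]; exact List.mem_cons_self)
          rw [hinsne a has] at ha
          obtain ⟨hb1, hb2⟩ := hprop a b hab ha
          have hbs : b ≠ sk := by
            intro h
            rw [h, hsnone] at hb1
            cases hb1
          refine ⟨by rw [hinsne b hbs]; exact hb1, ?_⟩
          have hgb : (c.insert sk 0).getD b 0 = c.getD b 0 := by
            rw [PySem.Dict.getD_eq_get?_getD, hinsne b hbs, ← PySem.Dict.getD_eq_get?_getD]
          have hga : (c.insert sk 0).getD a 0 = c.getD a 0 := by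
            rw [PySem.Dict.getD_eq_get?_getD, hinsne a has, ← PySem.Dict.getD_eq_get?_getD]
          rw [hgb, hga]
          exact hb2)
        (by
          have := pvUnc_le adj.keys (c.insert sk 0)
          simp only [List.length_singleton]
          omega)
      rcases hl : pvColorLoop adj (adj.size + 1) (c.insert sk 0) [sk] with _ | c1
      · constructor
        · intro _; exact hloop.1 hl
        · intro c' h
          simp at h
      · obtain ⟨f1, f2, f3⟩ := hloop.2 c1 hl
        have hrec := ih c1 f2 f3
        constructor
        · exact hrec.1
        · intro c' h
          obtain ⟨g1, g0, g2, g3⟩ := hrec.2 c' h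
          have hmono : ∀ x, (c.get? x).isSome = true → (c1.get? x).isSome = true := by
            intro x hx
            have hxs : x ≠ sk := by
              intro h
              rw [h, hsnone] at hx
              cases hx
            have : (c.insert sk 0).get? x = c.get? x := hinsne x hxs
            rw [f1 x (by rw [this]; exact hx), this]
            exact hx
          refine ⟨fun x hx => g1 x (hmono x hx), g0, g2, ?_⟩
          intro x hx
          rcases List.mem_cons.mp hx with hxv | hx'
          · subst hxv
            exact g1 x (f1 x (by rw [hins]; rfl) ▸ (by rw [hins]; rfl))
          · exact g3 x hx'

-- a proper coloring forces walk parities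
lemma pvConn_proper {E : List (Int × Int × Int)} {c : PySem.Dict Int Int}
    (hvals : ∀ x w, c.get? x = some w → w = 0 ∨ w = 1)
    (hProp : ∀ a b, pvIsEdge E a b → (c.get? a).isSome = true →
      (c.get? b).isSome = true ∧ ¬ c.getD b 0 = c.getD a 0) :
    ∀ {x y : Int} {p : Bool}, pvConn E x y p → (c.get? x).isSome = true →
      (c.get? y).isSome = true ∧ ((c.getD y 0 == 1) = ((c.getD x 0 == 1) ^^ p)) := by
  intro x y p h
  induction h with
  | refl =>
    intro hx
    exact ⟨hx, by rw [Bool.xor_false]⟩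
  | step h e ihh =>
    rename_i a b p'
    intro hx
    obtain ⟨hya, hpar⟩ := ihh hx
    obtain ⟨hzb, hne⟩ := hProp a b e hya
    refine ⟨hzb, ?_⟩
    obtain ⟨wa, hwa⟩ := Option.isSome_iff_exists.mp hya
    obtain ⟨wb, hwb⟩ := Option.isSome_iff_exists.mp hzb
    have hda : c.getD a 0 = wa := by rw [PySem.Dict.getD_eq_get?_getD, hwa]; rfl
    have hdb : c.getD b 0 = wb := by rw [PySem.Dict.getD_eq_get?_getD, hwb]; rfl
    have hflip : ((c.getD x 0 == 1) ^^ !p') = (!((c.getD x 0 == 1) ^^ p')) := by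
      cases (c.getD x 0 == 1) <;> cases p' <;> rfl
    rcases hvals a wa hwa with rfl | rfl <;> rcases hvals b wb hwb with rfl | rfl <;>
      rw [hda] at hpar hne <;> rw [hdb] at hne ⊢ <;>
      first
        | (exact absurd rfl hne)
        | (rw [hflip, ← hpar]; rfl)

lemma pvConn_touch {E : List (Int × Int × Int)} {x y : Int} {p : Bool}
    (h : pvConn E x y p) : (x = y ∧ p = false) ∨ ∃ z, pvIsEdge E y z := by
  induction h with
  | refl => exact Or.inl ⟨rfl, rfl⟩
  | step h e ihh => exact Or.inr ⟨_, pvIsEdge_symm e⟩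

-- B's bipartite(k) is exactly bipartiteness of the prefix graph
lemma pvBipartiteOf_iff (E : List (Int × Int × Int)) :
    pvBipartiteOf E = true ↔ pvBip E := by
  have hseed := pvSeedLoop_spec E (pvAdjacency E) (fun u v => pvAdj_mem)
    (fun u hv => pvAdj_keys_mem.mpr hv) (pvAdj_keys_nodup E)
    (pvAdjacency E).keys PySem.Dict.empty
    (by intro x w hx; rw [PySem.Dict.get?_empty] at hx; cases hx)
    (by intro a b _ ha; rw [PySem.Dict.get?_empty] at ha; cases ha)
  rw [pvBipartiteOf]
  constructor
  · intro htrue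
    rcases hs : pvSeedLoop (pvAdjacency E) (pvAdjacency E).keys PySem.Dict.empty
      with _ | c'
    · rw [hs] at htrue; cases htrue
    · obtain ⟨_, g0, g2, g3⟩ := hseed.2 c' hs
      intro x hconnxx
      rcases pvConn_touch hconnxx with ⟨_, h⟩ | ⟨z, hz⟩
      · cases h
      · have hxk : x ∈ (pvAdjacency E).keys := pvAdj_keys_mem.mpr ⟨z, hz⟩
        have hxcol := g3 x hxk
        obtain ⟨_, hpar⟩ := pvConn_proper g0 g2 hconnxx hxcol
        rw [Bool.xor_true] at hpar
        exact absurd hpar (by cases (c'.getD x 0 == 1) <;> simp)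
  · intro hbip
    rcases hs : pvSeedLoop (pvAdjacency E) (pvAdjacency E).keys PySem.Dict.empty
      with _ | c'
    · exact absurd hbip (hseed.1 hs)
    · rfl


-- ---- initial state, edge ranges, prefixes, binary search ----

lemma pvConn_nil {x y : Int} {p : Bool} (h : pvConn [] x y p) : x = y ∧ p = false := by
  have hiso : ∀ z, ¬ pvIsEdge ([] : List (Int × Int × Int)) y z := by
    rintro z ⟨d, hm | hm⟩ <;> cases hm
  have h2 := pvConn_isolated (i := y) (fun z hz => hiso z hz) h
  exact h2

lemma pvInvA_init (n : Nat) :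
    pvInvA (n : Int) [] (PySem.List.pyRange 0 (n : Int) 1) PySem.Dict.empty := by
  refine ⟨pvInit_inv n, by rw [pvInit_len], ?_, ?_, ?_, ?_⟩
  · intro x v h
    rw [PySem.Dict.get?_empty] at h
    cases h
  · rintro x y ⟨d, hm | hm⟩ <;> cases hm
  · intro x h
    obtain ⟨_, h2⟩ := pvConn_nil h
    cases h2
  · intro x y hx0 hx1 hy0 hy1
    have hx1' : x < ((PySem.List.pyRange 0 (n : Int) 1).length : Int) := by
      rw [pvInit_len]; exact hx1
    have hy1' : y < ((PySem.List.pyRange 0 (n : Int) 1).length : Int) := by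
      rw [pvInit_len]; exact hy1
    rw [pvRoot_of_fix (pvInit_fix n hx0 hx1'), pvRoot_of_fix (pvInit_fix n hy0 hy1')]
    constructor
    · intro h; subst h; exact pvConn.refl x
    · intro h; exact (pvConn_nil h).1

lemma pvRangeOK_sorted (points : List (List Int)) :
    pvRangeOK (points.length : Int) (pvSortedEdges points) := by
  intro e he
  rw [pvSortedEdges, PySem.List.mem_sorted] at he
  simp only [pvEdges, List.mem_flatMap, List.mem_map] at he
  obtain ⟨i, hi, j, hj, rfl⟩ := he
  rw [PySem.List.mem_pyRange_one] at hi hj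
  refine ⟨hi.1, by simpa using hi.2, ?_, by simpa using hj.2⟩
  show (0 : Int) ≤ j
  omega

lemma pvBip_prefix {E : List (Int × Int × Int)} {k k' : Nat} (h : k ≤ k')
    (hB : pvBip (E.take k')) : pvBip (E.take k) := by
  intro x hx
  apply hB x
  refine pvConn_mono ?_ hx
  intro e he
  have : E.take k = (E.take k').take k := by rw [List.take_take, Nat.min_eq_left h]
  rw [this] at he
  exact List.take_subset _ _ he

lemma pvSlice_take (dist : List (Int × Int × Int)) (k : Int) (h0 : 0 ≤ k) :
    PySem.List.slice dist none (some k) = dist.take k.toNat := by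
  have : k = (k.toNat : Int) := by omega
  rw [this, PySem.List.slice_to_natCast, Int.toNat_natCast]

lemma pvBipartite_iff (dist : List (Int × Int × Int)) (k : Int) (h0 : 0 ≤ k) :
    pvBipartite dist k = true ↔ pvBip (dist.take k.toNat) := by
  rw [pvBipartite, pvSlice_take dist k h0]
  exact pvBipartiteOf_iff _

lemma pvBsearch_spec (dist : List (Int × Int × Int)) :
    ∀ (fuel : Nat) (lo hi : Int), 0 ≤ lo → lo < hi → (hi - lo).toNat ≤ fuel →
    pvBipartite dist lo = true → pvBipartite dist hi = false →
    ∃ h : Int, lo < h ∧ h ≤ hi ∧ pvBipartite dist (h - 1) = true ∧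
      pvBipartite dist h = false ∧
      pvBsearch dist fuel lo hi = (PySem.List.pyGetD dist (h - 1) (0, 0, 0)).1 := by
  intro fuel
  induction fuel with
  | zero => intro lo hi h0 hlt hf _ _; omega
  | succ f ih =>
    intro lo hi h0 hlt hf hblo hbhi
    by_cases hgt : 1 < hi - lo
    · have hmid1 : lo < PySem.Int.floordiv (lo + hi) 2 := by
        have := (PySem.Int.le_floordiv_iff_mul_le (a := lo + hi) (q := lo + 1)
          (by omega : (0 : Int) < 2)).mpr (by omega)
        omega
      have hmid2 : PySem.Int.floordiv (lo + hi) 2 < hi := by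
        exact (PySem.Int.floordiv_lt_iff_lt_mul (a := lo + hi) (q := hi)
          (by omega : (0 : Int) < 2)).mpr (by omega)
      by_cases hbm : pvBipartite dist (PySem.Int.floordiv (lo + hi) 2) = true
      · obtain ⟨h, e1, e2, e3, e4, e5⟩ := ih (PySem.Int.floordiv (lo + hi) 2) hi
          (by omega) hmid2 (by omega) hbm hbhi
        refine ⟨h, by omega, e2, e3, e4, ?_⟩
        rw [pvBsearch, if_pos hgt]
        simp only [if_pos hbm]
        exact e5
      · have hbm' : pvBipartite dist (PySem.Int.floordiv (lo + hi) 2) = false := by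
          cases hv : pvBipartite dist (PySem.Int.floordiv (lo + hi) 2)
          · rfl
          · exact absurd hv hbm
        obtain ⟨h, e1, e2, e3, e4, e5⟩ := ih lo (PySem.Int.floordiv (lo + hi) 2)
          h0 hmid1 (by omega) hblo hbm'
        refine ⟨h, e1, by omega, e3, e4, ?_⟩
        rw [pvBsearch, if_pos hgt]
        simp only [if_neg hbm]
        exact e5
    · refine ⟨hi, hlt, le_refl _, ?_, hbhi, ?_⟩
      · have : hi - 1 = lo := by omega
        rw [this]
        exact hblo
      · rw [pvBsearch, if_neg hgt]

lemma pvBip_nil : pvBip ([] : List (Int × Int × Int)) := by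
  intro x h
  exact absurd (pvConn_nil h).2 (by simp)

-- ===== VERDICT (by name: the statement is the Claim_ definition above) =====
theorem maxPartitionFactor_spec : Claim_equal_maxPartitionFactor := by
  unfold Claim_equal_maxPartitionFactor
  intro points _ _
  unfold Spec_maxPartitionFactor
  by_cases h2 : points.length = 2
  · simp only [maxPartitionFactor, maxPartitionFactor_alt, if_pos h2]
  · simp only [maxPartitionFactor, maxPartitionFactor_alt, if_neg h2]
    have hchar := pvLoopA_char (pvSortedEdges points) (points.length : Int) []
      (PySem.List.pyRange 0 (points.length : Int) 1) (List.replicate points.length 1)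
      PySem.Dict.empty (pvInvA_init points.length) (pvRangeOK_sorted points)
    rcases hchar with ⟨hnone, hbip⟩ | ⟨r1, d', i', j', r2, heq, hsome, hb1, hb2⟩
    · -- never a conflict: the whole graph is bipartite, both take the last distance
      have hbip' : pvBip (pvSortedEdges points) := by simpa using hbip
      have hbtrue : pvBipartite (pvSortedEdges points)
          ((pvSortedEdges points).length : Int) = true := by
        rw [pvBipartite_iff _ _ (Int.natCast_nonneg _), Int.toNat_natCast, List.take_length]
        exact hbip'
      rw [hnone, if_pos hbtrue]
    · -- conflict at the edge after prefix r1
      have hb1' : pvBip r1 := by simpa using hb1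
      have hb2' : ¬ pvBip (r1 ++ [(d', i', j')]) := by simpa using hb2
      have ht1 : (pvSortedEdges points).take r1.length = r1 := by
        rw [heq]; exact List.take_left
      have ht2 : (pvSortedEdges points).take (r1.length + 1) = r1 ++ [(d', i', j')] := by
        rw [heq, show r1 ++ (d', i', j') :: r2 = (r1 ++ [(d', i', j')]) ++ r2 by simp]
        have := List.take_left (l₁ := r1 ++ [(d', i', j')]) (l₂ := r2)
        rwa [List.length_append, List.length_cons, List.length_nil] at this
      have hlen : r1.length + 1 ≤ (pvSortedEdges points).length := by
        rw [heq, List.length_append, List.length_cons]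
        omega
      have hbffull : pvBipartite (pvSortedEdges points)
          ((pvSortedEdges points).length : Int) = false := by
        cases hv : pvBipartite (pvSortedEdges points) ((pvSortedEdges points).length : Int)
        · rfl
        · exfalso
          have := (pvBipartite_iff _ _ (Int.natCast_nonneg _)).mp hv
          rw [Int.toNat_natCast, List.take_length] at this
          exact hb2' (by
            have h5 := pvBip_prefix (E := pvSortedEdges points) hlen
              (by rw [List.take_length]; exact this)
            rw [ht2] at h5
            exact h5)
      have hblo : pvBipartite (pvSortedEdges points) 0 = true := by
        rw [pvBipartite_iff _ _ (le_refl 0)]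
        simpa using pvBip_nil
      have hlt : (0 : Int) < ((pvSortedEdges points).length : Int) := by
        rw [heq]
        simp only [List.length_append, List.length_cons]
        positivity
      obtain ⟨h, e1, e2, e3, e4, e5⟩ := pvBsearch_spec (pvSortedEdges points)
        (pvSortedEdges points).length 0 ((pvSortedEdges points).length : Int)
        (le_refl 0) hlt (by omega) hblo hbffull
      have h3 : pvBip ((pvSortedEdges points).take (h - 1).toNat) :=
        (pvBipartite_iff _ _ (by omega)).mp e3
      have h4 : ¬ pvBip ((pvSortedEdges points).take h.toNat) := by
        intro hb
        have := (pvBipartite_iff _ _ (by omega)).mpr hb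
        rw [e4] at this
        cases this
      have hh : h = (r1.length : Int) + 1 := by
        by_contra hne
        have he2 : h ≤ ((pvSortedEdges points).length : Int) := e2
        rcases lt_or_ge h ((r1.length : Int) + 1) with hlo | hhi
        · -- h ≤ t: prefix h of a bipartite prefix, contradicting ¬bip(h)
          apply h4
          have hsub : h.toNat ≤ r1.length := by omega
          have := pvBip_prefix hsub (by rw [ht1]; exact hb1')
          exact this
        · -- h ≥ t + 2: bip(h-1) would cover the conflicting prefix
          apply hb2'
          have hsub : r1.length + 1 ≤ (h - 1).toNat := by omega
          have := pvBip_prefix hsub h3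
          rw [ht2] at this
          exact this
      rw [hsome, e5, hh]
      have harg : (r1.length : Int) + 1 - 1 = (r1.length : Int) := by ring
      rw [harg, PySem.List.pyGetD_natCast]
      have hgd : (pvSortedEdges points).getD r1.length (0, 0, 0) = (d', i', j') := by
        rw [heq, List.getD_eq_getElem?_getD, List.getElem?_append_right (Nat.le_refl _)]
        simp
      rw [hgd, if_neg (by rw [hbffull]; exact Bool.false_ne_true)]
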